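-- pv_equiv track=rewrite | github.com/PetarMihailov/Softuni_Python | Fundamentals/Lists_Advanced/More_Exercise/kate's_way_out.py | kate_escape
-- ===== SOURCE A (Python) =====
-- from collections import deque
--
-- def find_kate_in_maze(rows, maze):
--     for r in range(rows):
--         for c in range(len(maze[r])):
--             if maze[r][c] == 'k':
--                 return r, c
--     return None
--
-- def kate_escape(maze):
--     rows = len(maze)
--     cols = len(maze[0])
--
--     # Find Kate's initial position
--     start = find_kate_in_maze(rows, maze)
--     if not start:
--         return "Kate cannot get out"
--
--     # Initialize BFS
--     queue = deque([(start[0], start[1], 0)])  # (row, col, steps)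
--     visited = set([start])
--     max_moves = 0
--     escaped = False
--
--     # Directions for movement: up, down, left, right
--     directions = [(-1, 0), (1, 0), (0, -1), (0, 1)]
--
--     while queue:
--         x, y, steps = queue.popleft()
--
--         # Check if Kate is at the edge (exit condition)
--         if x == 0 or x == rows - 1 or y == 0 or y == cols - 1:
--             escaped = True
--             max_moves = max(max_moves, steps + 1)  # Update maximum moves
--
--         # Explore neighbors
--         for dx, dy in directions:
--             nx, ny = x + dx, y + dy
--             if 0 <= nx < rows and 0 <= ny < cols and (nx, ny) not in visited:
--                 if maze[nx][ny] == ' ':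
--                     queue.append((nx, ny, steps + 1))
--                     visited.add((nx, ny))
--
--     if escaped:
--         return f"Kate got out in {max_moves} moves"
--     else:
--         return "Kate cannot get out"
-- ===== SOURCE B (Python) =====
-- def kate_escape(maze):
--     rows = len(maze)
--     cols = len(maze[0])
--
--     # Find Kate's position: first row containing 'k', first 'k' in that row
--     start = None
--     for r in range(rows):
--         c = maze[r].find('k')
--         if c != -1:
--             start = (r, c)
--             break
--     if start is None:
--         return "Kate cannot get out"
--
--     # Queue-free shortest distances: Bellman-Ford-style label propagation.
--     # Repeatedly sweep the whole grid; an unlabeled ' ' cell whose neighbour is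
--     # labeled gets (min neighbour label) + 1.  Stop at the first unchanged sweep.
--     dist = {start: 0}
--     while True:
--         new = dict(dist)
--         for x in range(rows):
--             for y in range(cols):
--                 if (x, y) not in dist and maze[x][y] == ' ':
--                     around = [dist[n] for n in ((x - 1, y), (x + 1, y), (x, y - 1), (x, y + 1)) if n in dist]
--                     if around:
--                         new[(x, y)] = min(around) + 1
--         if new == dist:
--             break
--         dist = new
--
--     # Separate pass over only the perimeter coordinates
--     best = None
--     perimeter = [(0, c) for c in range(cols)] + [(rows - 1, c) for c in range(cols)] \
--         + [(r, 0) for r in range(rows)] + [(r, cols - 1) for r in range(rows)]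
--     for cell in perimeter:
--         if cell in dist:
--             d = dist[cell] + 1
--             if best is None or d > best:
--                 best = d
--     if best is None:
--         return "Kate cannot get out"
--     return f"Kate got out in {best} moves"
-- ===== Notes on version B (the rewrite author's own statement) =====
-- stated objective: alternative
-- what changed: A is a queue-based BFS (deque of (x,y,steps), visited set, edge test and max accumulator inside the dequeue loop); B uses no queue at all: it computes shortest distances by Bellman-Ford-style label propagation - repeated full-grid sweeps in which an unlabeled ' ' cell adjacent to a labeled cell receives min(neighbour labels)+1, iterated to a fixpoint - and then takes max(dist+1) over the perimeter coordinates.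
-- outside the precondition, e.g. on kate_escape(['##', '##k']): A returns 'Kate got out in 1 moves', B returns 'Kate cannot get out'
import Mathlib
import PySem

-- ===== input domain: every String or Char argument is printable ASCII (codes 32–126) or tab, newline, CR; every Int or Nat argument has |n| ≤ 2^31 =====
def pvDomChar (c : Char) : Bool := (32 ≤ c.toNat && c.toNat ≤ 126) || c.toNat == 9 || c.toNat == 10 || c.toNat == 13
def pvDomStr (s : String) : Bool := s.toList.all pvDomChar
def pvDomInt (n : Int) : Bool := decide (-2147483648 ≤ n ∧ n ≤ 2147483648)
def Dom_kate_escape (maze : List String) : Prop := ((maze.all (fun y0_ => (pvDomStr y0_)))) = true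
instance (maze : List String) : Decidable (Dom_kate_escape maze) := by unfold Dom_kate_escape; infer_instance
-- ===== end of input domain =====

-- B replaces A's queue-based BFS (deque, visited set, in-loop edge test) with queue-free
-- Bellman-Ford-style label propagation: repeated full-grid sweeps to a fixpoint, then a
-- perimeter pass (alternative algorithm; a timing run measured B faster on its generated inputs).


-- maze[x][y]; the '#' default is unreachable on inputs admitted by Pre_ (both programs
-- only index with 0 ≤ x < len(maze), 0 ≤ y < len(maze[0]) and Pre_ makes the maze rectangular there)
def mazeAt (maze : List String) (x y : Int) : Char :=
  ((PySem.List.pyGet? maze x).bind (fun row => PySem.List.pyGet? row.toList y)).getD '#'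

-- ===== PORT A =====
-- inner loop 'for c in range(len(maze[r])): if maze[r][c] == "k": return r, c'
def findKateRow : List Char → Int → Option Int
  | [], _ => none
  | ch :: rest, c => if ch = 'k' then some c else findKateRow rest (c + 1)

-- 'for r in range(rows)' with rows = len(maze): traversal of maze with a row counter
def findKateAux : List String → Int → Option (Int × Int)
  | [], _ => none
  | row :: rest, r =>
      match findKateRow row.toList 0 with
      | some c => some (r, c)
      | none => findKateAux rest (r + 1)

def find_kate_in_maze (rows : Int) (maze : List String) : Option (Int × Int) :=
  findKateAux maze 0

-- one neighbour update of A's BFS: bounds, 'not in visited', then maze[nx][ny] == ' '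
def stepA (maze : List String) (rows cols x y s : Int)
    (st : List (Int × Int × Int) × PySem.Set (Int × Int)) (d : Int × Int) :
    List (Int × Int × Int) × PySem.Set (Int × Int) :=
  let nx := x + d.1
  let ny := y + d.2
  if 0 ≤ nx ∧ nx < rows ∧ 0 ≤ ny ∧ ny < cols ∧ (nx, ny) ∉ st.2 then
    if mazeAt maze nx ny = ' ' then
      (st.1 ++ [(nx, ny, s + 1)], PySem.Set.add st.2 (nx, ny))
    else st
  else st

def dirsA : List (Int × Int) := [(-1, 0), (1, 0), (0, -1), (0, 1)]

-- 'while queue': fuel bounds the number of dequeues (every dequeue was one enqueue,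
-- and enqueues are the start cell plus distinct in-grid cells, ≤ rows*cols + 1 in all)
def loopA (maze : List String) (rows cols : Int) :
    Nat → List (Int × Int × Int) → PySem.Set (Int × Int) → Int → Bool → Int × Bool
  | 0, _, _, m, e => (m, e)
  | _ + 1, [], _, m, e => (m, e)
  | fuel + 1, (x, y, s) :: rest, vis, m, e =>
      let me : Int × Bool :=
        if x = 0 ∨ x = rows - 1 ∨ y = 0 ∨ y = cols - 1 then (max m (s + 1), true) else (m, e)
      let qv := dirsA.foldl (stepA maze rows cols x y s) (rest, vis)
      loopA maze rows cols fuel qv.1 qv.2 me.1 me.2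

def kate_escape (maze : List String) : String :=
  let rows : Int := maze.length
  let cols : Int := ((maze.headD "").toList.length : Int)   -- len(maze[0]); Pre_ excludes the empty maze
  match find_kate_in_maze rows maze with
  | none => "Kate cannot get out"
  | some (sr, sc) =>
      let fuel := maze.length * (maze.headD "").toList.length + 1
      let r := loopA maze rows cols fuel [(sr, sc, 0)]
        (PySem.Set.add PySem.Set.empty (sr, sc)) 0 false
      if r.2 then "Kate got out in " ++ PySem.Int.toStr r.1 ++ " moves"
      else "Kate cannot get out"

-- ===== PORT B =====
-- 'c = maze[r].find("k"); if c != -1: start = (r, c); break' over r in range(rows)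
def findKateB : List String → Int → Option (Int × Int)
  | [], _ => none
  | row :: rest, r =>
      let c := PySem.Str.find row "k"
      if c ≠ -1 then some (r, c) else findKateB rest (r + 1)

-- the tuple ((x-1,y),(x+1,y),(x,y-1),(x,y+1)) iterated by Source B's comprehension
def neighOf (x y : Int) : List (Int × Int) := [(x - 1, y), (x + 1, y), (x, y - 1), (x, y + 1)]

-- body of the sweep for one cell (x,y): 'if (x,y) not in dist and maze[x][y] == " ":
--   around = [dist[n] for n in … if n in dist]; if around: new[(x,y)] = min(around) + 1'
def sweepCell (maze : List String) (old acc : PySem.Dict (Int × Int) Int)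
    (c : Int × Int) : PySem.Dict (Int × Int) Int :=
  if old.contains c = false ∧ mazeAt maze c.1 c.2 = ' ' then
    match PySem.List.min? ((neighOf c.1 c.2).filterMap (fun n => old.get? n)) (fun v => v) with
    | some m => acc.insert c (m + 1)
    | none => acc
  else acc

-- one full-grid sweep: 'new = dict(dist); for x in range(rows): for y in range(cols): …'
def sweep (maze : List String) (rows cols : Int)
    (old : PySem.Dict (Int × Int) Int) : PySem.Dict (Int × Int) Int :=
  (PySem.List.pyRange 0 rows 1).foldl
    (fun a x => (PySem.List.pyRange 0 cols 1).foldl (fun a2 y => sweepCell maze old a2 (x, y)) a)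
    old

-- 'while True: new = …; if new == dist: break; dist = new'.  The fuel only makes the
-- recursion total: every non-break iteration adds a key among the rows*cols grid cells,
-- so the loop always breaks within the given fuel (proved below).  'new == dist' in
-- Python compares the dicts; here new extends dist in insertion order, so it is the
-- same test as dict equality.
def relaxLoop (maze : List String) (rows cols : Int) :
    Nat → PySem.Dict (Int × Int) Int → PySem.Dict (Int × Int) Int
  | 0, dist => dist
  | fuel + 1, dist =>
      let new := sweep maze rows cols dist
      if new = dist then dist else relaxLoop maze rows cols fuel new

-- the four perimeter comprehensions, concatenated in Source B's order
def perimeterList (rows cols : Int) : List (Int × Int) :=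
  (PySem.List.pyRange 0 cols 1).map (fun c => ((0 : Int), c))
    ++ (PySem.List.pyRange 0 cols 1).map (fun c => (rows - 1, c))
    ++ (PySem.List.pyRange 0 rows 1).map (fun r => (r, (0 : Int)))
    ++ (PySem.List.pyRange 0 rows 1).map (fun r => (r, cols - 1))

-- 'if cell in dist: d = dist[cell] + 1; if best is None or d > best: best = d'
def bestFold (dist : PySem.Dict (Int × Int) Int) (best : Option Int) (cell : Int × Int) :
    Option Int :=
  if dist.contains cell = true then
    let d := dist.getD cell 0 + 1
    match best with
    | none => some d
    | some v => if d > v then some d else some v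
  else best

def kate_escape_alt (maze : List String) : String :=
  let rows : Int := maze.length
  let cols : Int := ((maze.headD "").toList.length : Int)   -- len(maze[0]); Pre_ excludes the empty maze
  match findKateB maze 0 with
  | none => "Kate cannot get out"
  | some s =>
      let fuel := maze.length * (maze.headD "").toList.length + 1
      let dist := relaxLoop maze rows cols fuel (PySem.Dict.empty.insert s 0)
      match (perimeterList rows cols).foldl (bestFold dist) none with
      | none => "Kate cannot get out"
      | some b => "Kate got out in " ++ PySem.Int.toStr b ++ " moves"

-- ===== PRECONDITION & SPEC =====
-- Pre_ excludes the empty maze (A raises IndexError on maze[0]) and ragged mazes that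
-- contain 'k': on those A's BFS may raise IndexError and, where it happens to return, the
-- result depends on cells lying beyond the width of row 0 — an artefact of taking cols
-- from row 0 while indexing other rows with it.
def Pre_kate_escape (maze : List String) : Prop :=
  maze ≠ [] ∧
    ((∃ row ∈ maze, 'k' ∈ row.toList) →
      ∀ row ∈ maze, row.toList.length = (maze.headD "").toList.length)
instance (maze : List String) : Decidable (Pre_kate_escape maze) := by
  unfold Pre_kate_escape; infer_instance

def pvWitness_kate_escape : List String := ["###", "#k#", "# #"]

def Spec_kate_escape (maze : List String) (out : String) : Prop := out = kate_escape_alt maze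
instance (maze : List String) (out : String) : Decidable (Spec_kate_escape maze out) := by
  unfold Spec_kate_escape; infer_instance

-- ===== CLAIM (what is proved, stated in full; the proofs are below) =====
def Claim_equal_kate_escape : Prop :=
  ∀ (maze : List String), Dom_kate_escape maze → Pre_kate_escape maze →
    Spec_kate_escape maze (kate_escape maze)

-- ===== LEMMAS AND PROOFS =====

abbrev KD := PySem.Dict (Int × Int) Int

def InGrid (rows cols : Int) (c : Int × Int) : Prop :=
  0 ≤ c.1 ∧ c.1 < rows ∧ 0 ≤ c.2 ∧ c.2 < cols

def annotC (dist : KD) (c : Int × Int) : Int × Int × Int := (c.1, c.2, dist.getD c 0)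

def edgeStep (rows cols : Int) (p : Int × Bool) (cs : (Int × Int) × Int) : Int × Bool :=
  if cs.1.1 = 0 ∨ cs.1.1 = rows - 1 ∨ cs.1.2 = 0 ∨ cs.1.2 = cols - 1
  then (max p.1 (cs.2 + 1), true) else p

-- reference queue BFS (proof device): the same dequeue order as A's loop, recording a
-- distance dict; A's loop is proved to be in lockstep with it, and the relaxation
-- fixpoint is proved to agree with its final dict
def stepB (maze : List String) (rows cols x y : Int)
    (st : List (Int × Int) × PySem.Dict (Int × Int) Int) (n : Int × Int) :
    List (Int × Int) × PySem.Dict (Int × Int) Int :=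
  if 0 ≤ n.1 ∧ n.1 < rows ∧ 0 ≤ n.2 ∧ n.2 < cols ∧ st.2.contains n = false then
    if mazeAt maze n.1 n.2 = ' ' then
      (st.1 ++ [n], st.2.insert n (st.2.getD (x, y) 0 + 1))
    else st
  else st

def loopB (maze : List String) (rows cols : Int) :
    Nat → List (Int × Int) → PySem.Dict (Int × Int) Int → PySem.Dict (Int × Int) Int
  | 0, _, dist => dist
  | _ + 1, [], dist => dist
  | fuel + 1, (x, y) :: rest, dist =>
      let qd := [(x - 1, y), (x + 1, y), (x, y - 1), (x, y + 1)].foldl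
        (stepB maze rows cols x y) (rest, dist)
      loopB maze rows cols fuel qd.1 qd.2

def traceB (maze : List String) (rows cols : Int) :
    Nat → List (Int × Int) → KD → List ((Int × Int) × Int)
  | 0, _, _ => []
  | _ + 1, [], _ => []
  | fuel + 1, (x, y) :: rest, dist =>
      let qd := [(x - 1, y), (x + 1, y), (x, y - 1), (x, y + 1)].foldl
        (stepB maze rows cols x y) (rest, dist)
      ((x, y), dist.getD (x, y) 0) :: traceB maze rows cols fuel qd.1 qd.2

def GoodDict (rows cols : Int) (dist : KD) : Prop :=
  dist.keys.Nodup ∧ (∀ k ∈ dist.keys, InGrid rows cols k) ∧ (∀ p ∈ dist.items, 0 ≤ p.2)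

def omaxStep (b : Option Int) (v : Int) : Option Int :=
  match b with
  | none => some v
  | some u => some (max u v)

-- adjacency and exact-length reachability over ' ' cells (shared semantics of both BFS
-- and the relaxation)
def Adj (c n : Int × Int) : Prop := n ∈ neighOf c.1 c.2

inductive Reach (maze : List String) (rows cols : Int) (s : Int × Int) :
    Nat → (Int × Int) → Prop
  | refl : Reach maze rows cols s 0 s
  | step {k : Nat} {c n : Int × Int} : Reach maze rows cols s k c → Adj c n →
      InGrid rows cols n → mazeAt maze n.1 n.2 = ' ' → Reach maze rows cols s (k + 1) n

def IsDist (maze : List String) (rows cols : Int) (s c : Int × Int) (d : Nat) : Prop :=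
  Reach maze rows cols s d c ∧ ∀ j, Reach maze rows cols s j c → d ≤ j

-- the final-dict characterisation both algorithms satisfy
def DictChar (maze : List String) (rows cols : Int) (s : Int × Int) (D : KD) : Prop :=
  (∀ (c : Int × Int) (k : Nat), Reach maze rows cols s k c →
      D.contains c = true ∧ D.getD c 0 ≤ (k : Int)) ∧
  (∀ p ∈ D.items, 0 ≤ p.2 ∧ Reach maze rows cols s p.2.toNat p.1)

-- BFS loop invariant
def BfsInv (maze : List String) (rows cols : Int) (s : Int × Int)
    (q : List (Int × Int)) (D : KD) : Prop :=
  (∀ c ∈ q, D.contains c = true) ∧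
  (∀ p ∈ D.items, 0 ≤ p.2 ∧ Reach maze rows cols s p.2.toNat p.1) ∧
  (∀ c, D.contains c = true → c ∉ q → ∀ n, Adj c n → InGrid rows cols n →
      mazeAt maze n.1 n.2 = ' ' → D.contains n = true ∧ D.getD n 0 ≤ D.getD c 0 + 1) ∧
  (q.map (fun c => D.getD c 0)).Pairwise (· ≤ ·) ∧
  (∀ c0 r0, q = c0 :: r0 →
      (∀ c, D.contains c = true → D.getD c 0 ≤ D.getD c0 0 + 1) ∧
      (∀ c, D.contains c = true → c ∉ q → D.getD c 0 ≤ D.getD c0 0)) ∧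
  q.Nodup

-- relaxation invariant after k sweeps
def RelChar (maze : List String) (rows cols : Int) (s : Int × Int) (k : Nat) (D : KD) : Prop :=
  (∀ c, D.contains c = true ↔ ∃ d, d ≤ k ∧ IsDist maze rows cols s c d) ∧
  (∀ p ∈ D.items, ∃ dd : Nat, p.2 = (dd : Int) ∧ IsDist maze rows cols s p.1 dd)

def gridCells (rows cols : Int) : List (Int × Int) :=
  (PySem.List.pyRange 0 rows 1).flatMap
    (fun x => (PySem.List.pyRange 0 cols 1).map (fun y => (x, y)))

-- ---------- small generic lemmas ----------

lemma adj_symm (c n : Int × Int) (h : Adj c n) : Adj n c := by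
  obtain ⟨x, y⟩ := c
  obtain ⟨a, b⟩ := n
  simp only [Adj, neighOf, List.mem_cons, Prod.mk.injEq,
    List.not_mem_nil, or_false] at h ⊢
  omega

lemma reach_zero (maze : List String) (rows cols : Int) (s c : Int × Int)
    (h : Reach maze rows cols s 0 c) : c = s := by
  cases h
  rfl

lemma reach_succ_inv (maze : List String) (rows cols : Int) (s c : Int × Int) (k : Nat)
    (h : Reach maze rows cols s (k + 1) c) :
    ∃ p, Reach maze rows cols s k p ∧ Adj p c ∧ InGrid rows cols c ∧
      mazeAt maze c.1 c.2 = ' ' := by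
  cases h with
  | step hr ha hg hm => exact ⟨_, hr, ha, hg, hm⟩

lemma exists_isDist (maze : List String) (rows cols : Int) (s c : Int × Int) (k : Nat)
    (h : Reach maze rows cols s k c) :
    ∃ d, IsDist maze rows cols s c d ∧ d ≤ k := by
  haveI : DecidablePred (fun j => Reach maze rows cols s j c) := fun _ => Classical.dec _
  have H : ∃ j, Reach maze rows cols s j c := ⟨k, h⟩
  refine ⟨Nat.find H, ⟨Nat.find_spec H, ?_⟩, Nat.find_min' H h⟩
  intro j hj
  exact Nat.find_min' H hj

lemma isDist_unique (maze : List String) (rows cols : Int) (s c : Int × Int) (d1 d2 : Nat)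
    (h1 : IsDist maze rows cols s c d1) (h2 : IsDist maze rows cols s c d2) : d1 = d2 :=
  le_antisymm (h1.2 _ h2.1) (h2.2 _ h1.1)

lemma isDist_start (maze : List String) (rows cols : Int) (s : Int × Int) :
    IsDist maze rows cols s s 0 :=
  ⟨Reach.refl, fun j _ => Nat.zero_le j⟩

lemma getD_of_not_contains (D : KD) (c : Int × Int) (h : D.contains c = false) :
    D.getD c 0 = 0 := by
  rw [PySem.Dict.getD_eq_get?_getD]
  have : D.get? c = none := by
    cases hg : D.get? c with
    | none => rfl
    | some v =>
        rw [PySem.Dict.contains_eq_isSome_get?, hg] at h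
        simp at h
  simp [this]

lemma contains_value (maze : List String) (rows cols : Int) (s c : Int × Int) (D : KD)
    (hsound : ∀ p ∈ D.items, 0 ≤ p.2 ∧ Reach maze rows cols s p.2.toNat p.1)
    (hc : D.contains c = true) :
    ∃ v : Int, D.getD c 0 = v ∧ 0 ≤ v ∧ Reach maze rows cols s v.toNat c := by
  rw [PySem.Dict.contains_eq_isSome_get?] at hc
  obtain ⟨v, hv⟩ := Option.isSome_iff_exists.mp hc
  obtain ⟨h0, hr⟩ := hsound (c, v) (PySem.Dict.mem_items_of_get?_eq_some _ hv)
  refine ⟨v, ?_, h0, hr⟩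
  rw [PySem.Dict.getD_eq_get?_getD, hv]
  rfl

-- two dicts with the DictChar characterisation agree in contains and getD
lemma char_agree (maze : List String) (rows cols : Int) (s : Int × Int) (D1 D2 : KD)
    (h1 : DictChar maze rows cols s D1) (h2 : DictChar maze rows cols s D2)
    (_n1 : D1.keys.Nodup) (_n2 : D2.keys.Nodup) (c : Int × Int) :
    D1.contains c = D2.contains c ∧ D1.getD c 0 = D2.getD c 0 := by
  by_cases hc1 : D1.contains c = true
  · obtain ⟨v1, hv1, h01, hr1⟩ := contains_value maze rows cols s c D1 h1.2 hc1
    obtain ⟨hc2, hle2⟩ := h2.1 c v1.toNat hr1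
    obtain ⟨v2, hv2, h02, hr2⟩ := contains_value maze rows cols s c D2 h2.2 hc2
    obtain ⟨_, hle1⟩ := h1.1 c v2.toNat hr2
    have e1 : ((v1.toNat : Nat) : Int) = v1 := Int.toNat_of_nonneg h01
    have e2 : ((v2.toNat : Nat) : Int) = v2 := Int.toNat_of_nonneg h02
    rw [hc1, hc2, hv1, hv2]
    refine ⟨rfl, ?_⟩
    rw [hv1] at hle1
    rw [hv2] at hle2
    omega
  · have hc1f : D1.contains c = false := by
      cases hb : D1.contains c
      · rfl
      · exact absurd hb hc1
    have hc2f : D2.contains c = false := by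
      cases hb : D2.contains c
      · rfl
      · obtain ⟨v2, _, h02, hr2⟩ := contains_value maze rows cols s c D2 h2.2 hb
        exact absurd (h1.1 c v2.toNat hr2).1 hc1
    rw [hc1f, hc2f, getD_of_not_contains D1 c hc1f, getD_of_not_contains D2 c hc2f]
    exact ⟨rfl, rfl⟩

lemma bestFold_congr (D1 D2 : KD)
    (h : ∀ c, D1.contains c = D2.contains c ∧ D1.getD c 0 = D2.getD c 0) :
    ∀ (P : List (Int × Int)) (acc : Option Int),
      P.foldl (bestFold D1) acc = P.foldl (bestFold D2) acc := by
  intro P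
  induction P with
  | nil => intro acc; rfl
  | cons c t ih =>
      intro acc
      have hstep : bestFold D1 acc c = bestFold D2 acc c := by
        simp only [bestFold, (h c).1, (h c).2]
      simp only [List.foldl_cons, hstep, ih]

-- ---------- old A-side lockstep machinery (unchanged) ----------

lemma step_lock (maze : List String) (rows cols x y s : Int) (d : Int × Int)
    (q : List (Int × Int)) (dist : KD) (vis : PySem.Set (Int × Int))
    (hvis : ∀ c, c ∈ vis ↔ dist.contains c = true)
    (hq : ∀ c ∈ q, dist.contains c = true)
    (hx : dist.contains (x, y) = true)
    (hs : dist.getD (x, y) 0 = s) :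
    (stepA maze rows cols x y s (q.map (annotC dist), vis) d).1
      = (stepB maze rows cols x y (q, dist) (x + d.1, y + d.2)).1.map
          (annotC (stepB maze rows cols x y (q, dist) (x + d.1, y + d.2)).2) ∧
    (∀ c, c ∈ (stepA maze rows cols x y s (q.map (annotC dist), vis) d).2 ↔
        (stepB maze rows cols x y (q, dist) (x + d.1, y + d.2)).2.contains c = true) ∧
    (∀ c ∈ (stepB maze rows cols x y (q, dist) (x + d.1, y + d.2)).1,
        (stepB maze rows cols x y (q, dist) (x + d.1, y + d.2)).2.contains c = true) ∧
    (stepB maze rows cols x y (q, dist) (x + d.1, y + d.2)).2.contains (x, y) = true ∧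
    (stepB maze rows cols x y (q, dist) (x + d.1, y + d.2)).2.getD (x, y) 0 = s := by
  have hiff : ((x + d.1, y + d.2) ∉ vis) ↔ (dist.contains (x + d.1, y + d.2) = false) := by
    rw [← Bool.not_eq_true]
    exact not_congr (hvis _)
  simp only [stepA, stepB]
  by_cases hb : 0 ≤ x + d.1 ∧ x + d.1 < rows ∧ 0 ≤ y + d.2 ∧ y + d.2 < cols ∧
      dist.contains (x + d.1, y + d.2) = false
  · have hbA : 0 ≤ x + d.1 ∧ x + d.1 < rows ∧ 0 ≤ y + d.2 ∧ y + d.2 < cols ∧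
        (x + d.1, y + d.2) ∉ (q.map (annotC dist), vis).2 := by
      exact ⟨hb.1, hb.2.1, hb.2.2.1, hb.2.2.2.1, hiff.mpr hb.2.2.2.2⟩
    rw [if_pos hbA, if_pos hb]
    by_cases hm : mazeAt maze (x + d.1) (y + d.2) = ' '
    · rw [if_pos hm, if_pos hm]
      have hne : ∀ c : Int × Int, dist.contains c = true → c ≠ (x + d.1, y + d.2) := by
        intro c hc hceq
        rw [hceq] at hc
        rw [hb.2.2.2.2] at hc
        exact Bool.false_ne_true hc
      have hxy_ne : ((x, y) : Int × Int) ≠ (x + d.1, y + d.2) := hne _ hx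
      refine ⟨?_, ?_, ?_, ?_, ?_⟩
      · show q.map (annotC dist) ++ [(x + d.1, y + d.2, s + 1)]
          = (q ++ [(x + d.1, y + d.2)]).map
              (annotC (dist.insert (x + d.1, y + d.2) (dist.getD (x, y) 0 + 1)))
        rw [List.map_append]
        congr 1
        · apply List.map_congr_left
          intro c hc
          simp only [annotC]
          rw [PySem.Dict.getD_insert_of_ne dist _ _ (hne c (hq c hc))]
        · simp only [List.map_cons, List.map_nil, annotC]
          rw [PySem.Dict.getD_insert_self dist, hs]
      · intro c
        show c ∈ PySem.Set.add vis (x + d.1, y + d.2) ↔ _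
        rw [PySem.Set.mem_add, hvis c]
        simp only [PySem.Dict.contains_insert]
        constructor
        · rintro (hc | hc)
          · simp [hc]
          · simp [hc]
        · intro hc
          rcases Bool.or_eq_true_iff.mp hc with hc | hc
          · right; exact beq_iff_eq.mp hc
          · left; exact hc
      · intro c hc
        rcases List.mem_append.mp hc with hc | hc
        · simp [PySem.Dict.contains_insert, hq c hc]
        · simp only [List.mem_singleton] at hc
          subst hc
          exact PySem.Dict.contains_insert_self _ _ _
      · simp [PySem.Dict.contains_insert, hx]
      · show (dist.insert (x + d.1, y + d.2) (dist.getD (x, y) 0 + 1)).getD (x, y) 0 = s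
        rw [PySem.Dict.getD_insert_of_ne dist _ _ hxy_ne, hs]
    · rw [if_neg hm, if_neg hm]
      exact ⟨rfl, hvis, hq, hx, hs⟩
  · have hbA : ¬ (0 ≤ x + d.1 ∧ x + d.1 < rows ∧ 0 ≤ y + d.2 ∧ y + d.2 < cols ∧
        (x + d.1, y + d.2) ∉ (q.map (annotC dist), vis).2) := by
      intro hc
      exact hb ⟨hc.1, hc.2.1, hc.2.2.1, hc.2.2.2.1, hiff.mp hc.2.2.2.2⟩
    rw [if_neg hbA, if_neg hb]
    exact ⟨rfl, hvis, hq, hx, hs⟩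

lemma fold_lock (maze : List String) (rows cols x y s : Int) :
    ∀ (ds : List (Int × Int)) (q : List (Int × Int)) (dist : KD) (vis : PySem.Set (Int × Int)),
    (∀ c, c ∈ vis ↔ dist.contains c = true) →
    (∀ c ∈ q, dist.contains c = true) →
    dist.contains (x, y) = true →
    dist.getD (x, y) 0 = s →
    let rB := (ds.map (fun d => (x + d.1, y + d.2))).foldl (stepB maze rows cols x y) (q, dist)
    let rA := ds.foldl (stepA maze rows cols x y s) (q.map (annotC dist), vis)
    rA.1 = rB.1.map (annotC rB.2) ∧
    (∀ c, c ∈ rA.2 ↔ rB.2.contains c = true) ∧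
    (∀ c ∈ rB.1, rB.2.contains c = true) ∧
    rB.2.contains (x, y) = true ∧
    rB.2.getD (x, y) 0 = s := by
  intro ds
  induction ds with
  | nil =>
      intro q dist vis hvis hq hx hs
      exact ⟨rfl, hvis, hq, hx, hs⟩
  | cons d ds ih =>
      intro q dist vis hvis hq hx hs
      obtain ⟨h1, h2, h3, h4, h5⟩ := step_lock maze rows cols x y s d q dist vis hvis hq hx hs
      simp only [List.map_cons, List.foldl_cons]
      have hA : stepA maze rows cols x y s (q.map (annotC dist), vis) d
          = ((stepB maze rows cols x y (q, dist) (x + d.1, y + d.2)).1.map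
              (annotC (stepB maze rows cols x y (q, dist) (x + d.1, y + d.2)).2),
             (stepA maze rows cols x y s (q.map (annotC dist), vis) d).2) := by
        exact Prod.ext h1 rfl
      rw [hA]
      have hB : stepB maze rows cols x y (q, dist) (x + d.1, y + d.2)
          = ((stepB maze rows cols x y (q, dist) (x + d.1, y + d.2)).1,
             (stepB maze rows cols x y (q, dist) (x + d.1, y + d.2)).2) := rfl
      rw [hB]
      exact ih _ _ _ h2 h3 h4 h5

lemma lockstep (maze : List String) (rows cols : Int) :
    ∀ (fuel : Nat) (q : List (Int × Int)) (dist : KD) (vis : PySem.Set (Int × Int)) (m : Int) (e : Bool),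
    (∀ c ∈ q, dist.contains c = true) →
    (∀ c, c ∈ vis ↔ dist.contains c = true) →
    loopA maze rows cols fuel (q.map (annotC dist)) vis m e
      = (traceB maze rows cols fuel q dist).foldl (edgeStep rows cols) (m, e) := by
  intro fuel
  induction fuel with
  | zero => intro q dist vis m e hq hvis; rfl
  | succ fuel ih =>
      intro q dist vis m e hq hvis
      cases q with
      | nil => rfl
      | cons c rest =>
          obtain ⟨x, y⟩ := c
          have hx : dist.contains (x, y) = true := hq _ (by simp)
          have hnb : [(x - 1, y), (x + 1, y), (x, y - 1), (x, y + 1)]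
              = dirsA.map (fun d => (x + d.1, y + d.2)) := by
            simp [dirsA]
            omega
          simp only [List.map_cons, annotC, loopA, traceB]
          rw [hnb]
          obtain ⟨h1, h2, h3, h4, h5⟩ := fold_lock maze rows cols x y (dist.getD (x, y) 0) dirsA
            rest dist vis hvis (fun c hc => hq c (by simp [hc])) hx rfl
          rw [List.foldl_cons]
          have hstep : edgeStep rows cols (m, e) ((x, y), dist.getD (x, y) 0)
              = (if x = 0 ∨ x = rows - 1 ∨ y = 0 ∨ y = cols - 1
                 then (max m (dist.getD (x, y) 0 + 1), true) else (m, e)) := rfl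
          rw [← hstep] at *
          have hA1 := h1
          rw [hA1]
          exact ih _ _ _ _ _ h3 h2

lemma foldB_items (maze : List String) (rows cols x y : Int) :
    ∀ (ns : List (Int × Int)) (q : List (Int × Int)) (dist : KD),
    ∃ new : List ((Int × Int) × Int),
      (ns.foldl (stepB maze rows cols x y) (q, dist)).1 = q ++ new.map Prod.fst ∧
      (ns.foldl (stepB maze rows cols x y) (q, dist)).2.items = dist.items ++ new ∧
      (∀ c, dist.contains c = true →
        (ns.foldl (stepB maze rows cols x y) (q, dist)).2.get? c = dist.get? c) := by
  intro ns
  induction ns with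
  | nil =>
      intro q dist
      exact ⟨[], by simp, by simp, fun c _ => rfl⟩
  | cons n ns ih =>
      intro q dist
      simp only [List.foldl_cons, stepB]
      by_cases hb : 0 ≤ n.1 ∧ n.1 < rows ∧ 0 ≤ n.2 ∧ n.2 < cols ∧ dist.contains n = false
      · rw [if_pos hb]
        by_cases hm : mazeAt maze n.1 n.2 = ' '
        · rw [if_pos hm]
          obtain ⟨new1, h1, h2, h3⟩ := ih (q ++ [n]) (dist.insert n (dist.getD (x, y) 0 + 1))
          refine ⟨(n, dist.getD (x, y) 0 + 1) :: new1, ?_, ?_, ?_⟩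
          · rw [h1]
            simp
          · rw [h2, PySem.Dict.items_insert_of_not_contains dist _ hb.2.2.2.2]
            simp
          · intro c hc
            have hcne : c ≠ n := by
              intro hceq
              rw [hceq, hb.2.2.2.2] at hc
              exact Bool.false_ne_true hc
            have hc' : (dist.insert n (dist.getD (x, y) 0 + 1)).contains c = true := by
              simp [PySem.Dict.contains_insert, hc]
            rw [h3 c hc', PySem.Dict.get?_insert_of_ne dist _ hcne]
        · rw [if_neg hm]
          exact ih q dist
      · rw [if_neg hb]
        exact ih q dist

lemma loopB_items_prefix (maze : List String) (rows cols : Int) :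
    ∀ (fuel : Nat) (q : List (Int × Int)) (dist : KD),
    dist.items <+: (loopB maze rows cols fuel q dist).items := by
  intro fuel
  induction fuel with
  | zero => intro q dist; exact List.prefix_refl _
  | succ fuel ih =>
      intro q dist
      cases q with
      | nil => exact List.prefix_refl _
      | cons c rest =>
          obtain ⟨x, y⟩ := c
          simp only [loopB]
          obtain ⟨new, h1, h2, h3⟩ := foldB_items maze rows cols x y
            [(x - 1, y), (x + 1, y), (x, y - 1), (x, y + 1)] rest dist
          refine List.IsPrefix.trans ?_ (ih _ _)
          rw [h2]
          exact List.prefix_append _ _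

lemma getD_nonneg (dist : KD) (k : Int × Int)
    (hv : ∀ p ∈ dist.items, 0 ≤ p.2) : 0 ≤ dist.getD k 0 := by
  cases hg : dist.get? k with
  | none => simp [PySem.Dict.getD_eq_get?_getD, hg]
  | some v =>
      have := hv (k, v) (PySem.Dict.mem_items_of_get?_eq_some _ hg)
      simpa [PySem.Dict.getD_eq_get?_getD, hg] using this

lemma foldB_good (maze : List String) (rows cols x y : Int) :
    ∀ (ns : List (Int × Int)) (q : List (Int × Int)) (dist : KD),
    GoodDict rows cols dist →
    GoodDict rows cols (ns.foldl (stepB maze rows cols x y) (q, dist)).2 := by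
  intro ns
  induction ns with
  | nil => intro q dist h; exact h
  | cons n ns ih =>
      intro q dist hgood
      simp only [List.foldl_cons, stepB]
      by_cases hb : 0 ≤ n.1 ∧ n.1 < rows ∧ 0 ≤ n.2 ∧ n.2 < cols ∧ dist.contains n = false
      · rw [if_pos hb]
        by_cases hm : mazeAt maze n.1 n.2 = ' '
        · rw [if_pos hm]
          apply ih
          obtain ⟨hnd, hg, hv⟩ := hgood
          refine ⟨PySem.Dict.nodup_keys_insert dist _ _ hnd, ?_, ?_⟩
          · intro k hk
            rcases (PySem.Dict.mem_keys_insert dist _ k _).mp hk with hk | hk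
            · subst hk
              exact ⟨hb.1, hb.2.1, hb.2.2.1, hb.2.2.2.1⟩
            · exact hg k hk
          · intro p hp
            rcases (PySem.Dict.mem_items_insert dist _ _ p).mp hp with hp | hp
            · subst hp
              have := getD_nonneg dist (x, y) hv
              simp
              omega
            · exact hv p hp.1
        · rw [if_neg hm]
          exact ih q dist hgood
      · rw [if_neg hb]
        exact ih q dist hgood

lemma loopB_good (maze : List String) (rows cols : Int) :
    ∀ (fuel : Nat) (q : List (Int × Int)) (dist : KD),
    GoodDict rows cols dist →
    GoodDict rows cols (loopB maze rows cols fuel q dist) := by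
  intro fuel
  induction fuel with
  | zero => intro q dist h; exact h
  | succ fuel ih =>
      intro q dist hgood
      cases q with
      | nil => exact hgood
      | cons c rest =>
          obtain ⟨x, y⟩ := c
          simp only [loopB]
          exact ih _ _ (foldB_good maze rows cols x y _ rest dist hgood)

lemma card_bound (rows cols : Int) (dist : KD)
    (hnd : dist.keys.Nodup) (hg : ∀ k ∈ dist.keys, InGrid rows cols k) :
    dist.items.length ≤ rows.toNat * cols.toNat := by
  have hkeys : dist.items.length = dist.keys.length := by
    simp only [PySem.Dict.keys, List.length_map]
  rw [hkeys, ← List.toFinset_card_of_nodup hnd]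
  have hsub : dist.keys.toFinset ⊆ Finset.Icc (0 : Int) (rows - 1) ×ˢ Finset.Icc (0 : Int) (cols - 1) := by
    intro k hk
    obtain ⟨h1, h2, h3, h4⟩ := hg k (List.mem_toFinset.mp hk)
    rw [Finset.mem_product, Finset.mem_Icc, Finset.mem_Icc]
    omega
  have := Finset.card_le_card hsub
  rw [Finset.card_product, Int.card_Icc, Int.card_Icc] at this
  have h0 : (rows - 1 + 1 - 0).toNat = rows.toNat := by omega
  have h1 : (cols - 1 + 1 - 0).toNat = cols.toNat := by omega
  rw [h0, h1] at this
  exact this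

lemma trace_eq (maze : List String) (rows cols : Int) :
    ∀ (fuel : Nat) (q : List (Int × Int)) (dist : KD),
    GoodDict rows cols dist →
    (∀ c ∈ q, dist.contains c = true) →
    q.length + (rows.toNat * cols.toNat - dist.items.length) < fuel →
    traceB maze rows cols fuel q dist
      = q.map (fun c => (c, dist.getD c 0))
        ++ ((loopB maze rows cols fuel q dist).items.drop dist.items.length) := by
  intro fuel
  induction fuel with
  | zero =>
      intro q dist hgood hq hfuel
      omega
  | succ fuel ih =>
      intro q dist hgood hq hfuel
      cases q with
      | nil =>
          simp [traceB, loopB]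
      | cons c rest =>
          obtain ⟨x, y⟩ := c
          obtain ⟨new, h1, h2, h3⟩ := foldB_items maze rows cols x y
            [(x - 1, y), (x + 1, y), (x, y - 1), (x, y + 1)] rest dist
          have hgood' : GoodDict rows cols
              ([(x - 1, y), (x + 1, y), (x, y - 1), (x, y + 1)].foldl
                (stepB maze rows cols x y) (rest, dist)).2 :=
            foldB_good maze rows cols x y _ rest dist hgood
          set qd := [(x - 1, y), (x + 1, y), (x, y - 1), (x, y + 1)].foldl
            (stepB maze rows cols x y) (rest, dist) with hqd
          have hlen' : qd.2.items.length = dist.items.length + new.length := by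
            rw [h2, List.length_append]
          have hNbound : qd.2.items.length ≤ rows.toNat * cols.toNat :=
            card_bound rows cols qd.2 hgood'.1 hgood'.2.1
          have hq' : ∀ c ∈ qd.1, qd.2.contains c = true := by
            intro c hc
            rw [h1] at hc
            rcases List.mem_append.mp hc with hc | hc
            · rw [PySem.Dict.contains_eq_isSome_get?, h3 c (hq c (by simp [hc])),
                ← PySem.Dict.contains_eq_isSome_get?]
              exact hq c (by simp [hc])
            · obtain ⟨p, hp, hpc⟩ := List.mem_map.mp hc
              subst hpc
              apply (PySem.Dict.contains_iff_mem_keys qd.2 p.1).mpr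
              apply PySem.Dict.mem_keys_of_mem_items
              rw [h2]
              exact List.mem_append.mpr (Or.inr hp)
          have hfuel' : qd.1.length + (rows.toNat * cols.toNat - qd.2.items.length) < fuel := by
            have hq1 : qd.1.length = rest.length + new.length := by
              rw [h1, List.length_append, List.length_map]
            simp only [List.length_cons] at hfuel
            omega
          have IH := ih qd.1 qd.2 hgood' hq' hfuel'
          show ((x, y), dist.getD (x, y) 0) :: traceB maze rows cols fuel qd.1 qd.2
            = _ ++ (loopB maze rows cols fuel qd.1 qd.2).items.drop dist.items.length
          rw [IH]
          obtain ⟨t, ht⟩ := loopB_items_prefix maze rows cols fuel qd.1 qd.2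
          have hdrop1 : (loopB maze rows cols fuel qd.1 qd.2).items.drop dist.items.length
              = new ++ t := by
            rw [← ht, h2, List.append_assoc, List.drop_left]
          have hdrop2 : (loopB maze rows cols fuel qd.1 qd.2).items.drop qd.2.items.length
              = t := by
            rw [← ht, List.drop_left]
          have hmapq : qd.1.map (fun c => (c, qd.2.getD c 0))
              = rest.map (fun c => (c, dist.getD c 0)) ++ new := by
            rw [h1, List.map_append]
            congr 1
            · apply List.map_congr_left
              intro c hc
              have hgetD : qd.2.getD c 0 = dist.getD c 0 := by
                rw [PySem.Dict.getD_eq_get?_getD, h3 c (hq c (by simp [hc])),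
                  ← PySem.Dict.getD_eq_get?_getD]
              rw [hgetD]
            · rw [List.map_map]
              conv_rhs => rw [← List.map_id new]
              apply List.map_congr_left
              intro p hp
              obtain ⟨k, v⟩ := p
              have hval : qd.2.getD k 0 = v :=
                PySem.Dict.getD_of_mem_items qd.2
                  (by rw [h2]; exact List.mem_append.mpr (Or.inr hp)) hgood'.1 0
              simp [hval]
          rw [hmapq, hdrop1, hdrop2]
          simp [List.append_assoc]

lemma edge_fold_char (rows cols : Int) :
    ∀ (l : List ((Int × Int) × Int)) (m : Int) (e : Bool),
    l.foldl (edgeStep rows cols) (m, e)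
      = (((l.filter (fun p => decide (p.1.1 = 0 ∨ p.1.1 = rows - 1 ∨ p.1.2 = 0 ∨ p.1.2 = cols - 1))).map
            (fun p => p.2 + 1)).foldl max m,
         e || l.any (fun p => decide (p.1.1 = 0 ∨ p.1.1 = rows - 1 ∨ p.1.2 = 0 ∨ p.1.2 = cols - 1))) := by
  intro l
  induction l with
  | nil => intro m e; simp
  | cons p t ih =>
      intro m e
      by_cases hp : p.1.1 = 0 ∨ p.1.1 = rows - 1 ∨ p.1.2 = 0 ∨ p.1.2 = cols - 1
      · simp [edgeStep, hp, ih]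
      · push Not at hp
        simp [edgeStep, hp.1, hp.2.1, hp.2.2.1, hp.2.2.2, ih]

lemma best_fold_char (D : KD) :
    ∀ (P : List (Int × Int)) (acc : Option Int),
    P.foldl (bestFold D) acc
      = ((P.filter (fun c => D.contains c)).map (fun c => D.getD c 0 + 1)).foldl omaxStep acc := by
  intro P
  induction P with
  | nil => intro acc; rfl
  | cons c t ih =>
      intro acc
      by_cases hc : D.contains c = true
      · cases acc with
        | none => simp [bestFold, hc, ih, omaxStep]
        | some v =>
            by_cases hgt : D.getD c 0 + 1 > v
            · simp [bestFold, hc, ih, omaxStep, hgt, max_eq_right (le_of_lt hgt)]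
            · simp [bestFold, hc, ih, omaxStep, hgt, max_eq_left (not_lt.mp hgt)]
      · simp [bestFold, hc, ih]

lemma omax_some : ∀ (l : List Int) (a : Int), l.foldl omaxStep (some a) = some (l.foldl max a) := by
  intro l
  induction l with
  | nil => intro a; rfl
  | cons v t ih => intro a; simpa [omaxStep] using ih (max a v)

lemma omax_eq_max? : ∀ (l : List Int), l.foldl omaxStep none = l.max? := by
  intro l
  cases l with
  | nil => rfl
  | cons a t => simpa [List.max?, omaxStep] using omax_some t a

lemma max?_eq_of_mem_iff (l₁ l₂ : List Int) (h : ∀ v, v ∈ l₁ ↔ v ∈ l₂) :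
    l₁.max? = l₂.max? := by
  cases h1 : l₁.max? with
  | none =>
      have : l₁ = [] := List.max?_eq_none_iff.mp h1
      subst this
      have : l₂ = [] := by
        cases l₂ with
        | nil => rfl
        | cons a t => exact absurd ((h a).mpr (by simp)) (by simp)
      simp [this]
  | some m1 =>
      cases h2 : l₂.max? with
      | none =>
          have : l₂ = [] := List.max?_eq_none_iff.mp h2
          subst this
          exact absurd ((h m1).mp (List.max?_mem h1)) (by simp)
      | some m2 =>
          have hm1 : m1 ∈ l₂ := (h m1).mp (List.max?_mem h1)
          have hm2 : m2 ∈ l₁ := (h m2).mpr (List.max?_mem h2)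
          have h12 : m1 ≤ m2 := (List.max?_le_iff h2).mp le_rfl _ hm1
          have h21 : m2 ≤ m1 := (List.max?_le_iff h1).mp le_rfl _ hm2
          simp [le_antisymm h12 h21]

lemma max?_eq_foldl_zero (l : List Int) (hne : l ≠ []) (hpos : ∀ v ∈ l, 0 ≤ v) :
    l.max? = some (l.foldl max 0) := by
  cases l with
  | nil => exact absurd rfl hne
  | cons v t =>
      have hv : (0 : Int) ≤ v := hpos v (by simp)
      simp [List.max?, List.foldl_cons, max_eq_right hv]

lemma mem_perimeter_iff (rows cols : Int) (hr : 0 < rows) (hc : 0 < cols) (c : Int × Int) :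
    c ∈ perimeterList rows cols ↔
      InGrid rows cols c ∧ (c.1 = 0 ∨ c.1 = rows - 1 ∨ c.2 = 0 ∨ c.2 = cols - 1) := by
  obtain ⟨x, y⟩ := c
  simp only [perimeterList, List.mem_append, List.mem_map, PySem.List.mem_pyRange_one,
    InGrid, Prod.mk.injEq]
  constructor
  · rintro (((⟨v, ⟨h1, h2⟩, h3, h4⟩ | ⟨v, ⟨h1, h2⟩, h3, h4⟩) | ⟨v, ⟨h1, h2⟩, h3, h4⟩) | ⟨v, ⟨h1, h2⟩, h3, h4⟩) <;>
      subst h3 <;> subst h4 <;> refine ⟨⟨by omega, by omega, by omega, by omega⟩, by omega⟩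
  · rintro ⟨⟨ha, hb, hc2, hd⟩, (h | h | h | h)⟩
    · exact Or.inl (Or.inl (Or.inl ⟨y, ⟨hc2, hd⟩, h.symm, rfl⟩))
    · exact Or.inl (Or.inl (Or.inr ⟨y, ⟨hc2, hd⟩, h.symm, rfl⟩))
    · exact Or.inl (Or.inr ⟨x, ⟨ha, hb⟩, rfl, h.symm⟩)
    · exact Or.inr ⟨x, ⟨ha, hb⟩, rfl, h.symm⟩

lemma findKateRow_none (cs : List Char) (c : Int) (h : 'k' ∉ cs) :
    findKateRow cs c = none := by
  induction cs generalizing c with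
  | nil => rfl
  | cons ch t ih =>
      have h1 : ch ≠ 'k' := by intro hk; exact h (by simp [hk])
      simp [findKateRow, h1, ih (c + 1) (fun hm => h (by simp [hm]))]

lemma findKateRow_first (cs : List Char) :
    ∀ (j : Nat) (c : Int), cs[j]? = some 'k' → (∀ i < j, cs[i]? ≠ some 'k') →
    findKateRow cs c = some (c + j) := by
  induction cs with
  | nil => intro j c hj _; simp at hj
  | cons ch t ih =>
      intro j c hj hmin
      cases j with
      | zero => simp at hj; simp [findKateRow, hj]
      | succ j' =>
          have hch : ch ≠ 'k' := by
            intro hk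
            exact hmin 0 (Nat.succ_pos _) (by simp [hk])
          have := ih j' (c + 1) (by simpa using hj)
            (fun i hi => by simpa using hmin (i + 1) (Nat.succ_lt_succ hi))
          rw [findKateRow]
          simp only [hch, if_false, this]
          congr 1
          push_cast
          ring

lemma findKate_eq (l : List String) (r : Int) : findKateAux l r = findKateB l r := by
  induction l generalizing r with
  | nil => rfl
  | cons row rest ih =>
      rw [findKateAux, findKateB]
      have hfind : PySem.Str.find row "k" = PySem.Chars.find row.toList ['k'] := by
        simp [PySem.Str.find_eq]
      by_cases hneg : PySem.Chars.find row.toList ['k'] = -1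
      · have hnk : 'k' ∉ row.toList := by
          have := (PySem.Chars.find_eq_neg_one_iff row.toList ['k']).mp hneg
          simpa [List.singleton_infix_iff] using this
        simp only [findKateRow_none row.toList 0 hnk, hfind, hneg, ih]
        simp
      · have hnn : 0 ≤ PySem.Chars.find row.toList ['k'] := by
          have := PySem.Chars.neg_one_le_find row.toList ['k']
          omega
        obtain ⟨hpre, hmin⟩ := PySem.Chars.find_spec (s := row.toList) (sub := ['k']) hnn
        set j := (PySem.Chars.find row.toList ['k']).toNat with hj
        have hjk : row.toList[j]? = some 'k' := by
          obtain ⟨t, ht⟩ := hpre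
          rw [← List.head?_drop, ← ht]
          rfl
        have hminj : ∀ i < j, row.toList[i]? ≠ some 'k' := by
          intro i hi hik
          obtain ⟨t, ht⟩ := List.head?_eq_some_iff.mp (List.head?_drop ▸ hik)
          exact hmin i hi ⟨t, ht.symm⟩
        have hrow := findKateRow_first row.toList j 0 hjk hminj
        simp only [hrow, hfind, if_pos (by exact hneg)]
        simp [hj, Int.toNat_of_nonneg hnn]

lemma findKateRow_spec (cs : List Char) :
    ∀ (c b : Int), findKateRow cs c = some b →
    c ≤ b ∧ (b - c).toNat < cs.length ∧ cs[(b - c).toNat]? = some 'k' := by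
  induction cs with
  | nil => intro c b h; simp [findKateRow] at h
  | cons ch t ih =>
      intro c b h
      rw [findKateRow] at h
      by_cases hch : ch = 'k'
      · simp [hch] at h
        subst h
        refine ⟨le_refl _, by simp, ?_⟩
        simp [hch]
      · simp [hch] at h
        obtain ⟨h1, h2, h3⟩ := ih (c + 1) b h
        refine ⟨by omega, ?_, ?_⟩
        · have heq : (b - c).toNat = (b - (c + 1)).toNat + 1 := by omega
          simp only [heq, List.length_cons]
          omega
        · have heq : (b - c).toNat = (b - (c + 1)).toNat + 1 := by omega
          simp [heq, h3]

lemma findKateAux_spec (l : List String) :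
    ∀ (r a b : Int), findKateAux l r = some (a, b) →
    r ≤ a ∧ (a - r).toNat < l.length ∧ 0 ≤ b ∧
      ∃ row, l[(a - r).toNat]? = some row ∧ (b).toNat < row.toList.length ∧
        row.toList[(b).toNat]? = some 'k' := by
  induction l with
  | nil => intro r a b h; simp [findKateAux] at h
  | cons row rest ih =>
      intro r a b h
      rw [findKateAux] at h
      cases hrow : findKateRow row.toList 0 with
      | some c =>
          rw [hrow] at h
          simp at h
          obtain ⟨ha, hb⟩ := h
          obtain ⟨h1, h2, h3⟩ := findKateRow_spec row.toList 0 c hrow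
          subst ha hb
          refine ⟨le_refl _, by simp, by omega, row, ?_, ?_, ?_⟩
          · simp
          · simpa using h2
          · simpa using h3
      | none =>
          rw [hrow] at h
          obtain ⟨h1, h2, h3, row2, h4, h5, h6⟩ := ih (r + 1) a b h
          refine ⟨by omega, ?_, h3, row2, ?_, h5, h6⟩
          · have heq : (a - r).toNat = (a - (r + 1)).toNat + 1 := by omega
            simp only [heq, List.length_cons]
            omega
          · have heq : (a - r).toNat = (a - (r + 1)).toNat + 1 := by omega
            simp [heq, h4]

lemma final_compare (rows cols : Int) (D : KD) (hr : 0 < rows) (hc : 0 < cols)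
    (hgood : GoodDict rows cols D) :
    (let me := D.items.foldl (edgeStep rows cols) (0, false)
     (if me.2 then "Kate got out in " ++ PySem.Int.toStr me.1 ++ " moves" else "Kate cannot get out"))
      = (match (perimeterList rows cols).foldl (bestFold D) none with
         | none => "Kate cannot get out"
         | some b => "Kate got out in " ++ PySem.Int.toStr b ++ " moves") := by
  obtain ⟨hnd, hg, hv⟩ := hgood
  show (if (D.items.foldl (edgeStep rows cols) (0, false)).2
        then "Kate got out in " ++ PySem.Int.toStr
          (D.items.foldl (edgeStep rows cols) (0, false)).1 ++ " moves"
        else "Kate cannot get out") = _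
  rw [edge_fold_char rows cols D.items 0 false]
  rw [best_fold_char D (perimeterList rows cols) none, omax_eq_max?]
  set LA := ((D.items.filter
      (fun p => decide (p.1.1 = 0 ∨ p.1.1 = rows - 1 ∨ p.1.2 = 0 ∨ p.1.2 = cols - 1))).map
      (fun p => p.2 + 1)) with hLA
  set LB := (((perimeterList rows cols).filter (fun c => D.contains c)).map
      (fun c => D.getD c 0 + 1)) with hLB
  have hmem : ∀ v, v ∈ LA ↔ v ∈ LB := by
    intro v
    rw [hLA, hLB]
    simp only [List.mem_map, List.mem_filter]
    constructor
    · rintro ⟨p, ⟨hp, hpe⟩, hpv⟩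
      have hkey : p.1 ∈ D.keys := PySem.Dict.mem_keys_of_mem_items D hp
      refine ⟨p.1, ⟨?_, (PySem.Dict.contains_iff_mem_keys D p.1).mpr hkey⟩, ?_⟩
      · exact (mem_perimeter_iff rows cols hr hc p.1).mpr ⟨hg p.1 hkey, of_decide_eq_true hpe⟩
      · rw [PySem.Dict.getD_of_mem_items D (by exact (Prod.mk.eta (p := p)) ▸ hp) hnd 0]
        exact hpv
    · rintro ⟨c, ⟨hcP, hcc⟩, hcv⟩
      have hws : (PySem.Dict.get? D c).isSome = true := by
        rw [← PySem.Dict.contains_eq_isSome_get?]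
        exact hcc
      obtain ⟨w, hw⟩ := Option.isSome_iff_exists.mp hws
      have hitems : (c, w) ∈ D.items := PySem.Dict.mem_items_of_get?_eq_some _ hw
      refine ⟨(c, w), ⟨hitems, ?_⟩, ?_⟩
      · exact decide_eq_true ((mem_perimeter_iff rows cols hr hc c).mp hcP).2
      · rw [← hcv, PySem.Dict.getD_eq_get?_getD, hw]
        rfl
  have hpos : ∀ v ∈ LA, (0 : Int) ≤ v := by
    intro v hvv
    rw [hLA] at hvv
    obtain ⟨p, hp, hpv⟩ := List.mem_map.mp hvv
    have := hv p (List.mem_filter.mp hp).1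
    omega
  by_cases hA : LA = []
  · have hB : LB = [] := by
      cases hLBc : LB with
      | nil => rfl
      | cons b t =>
          exfalso
          have : b ∈ LA := (hmem b).mpr (by rw [hLBc]; simp)
          rw [hA] at this
          simp at this
    have hany : D.items.any
        (fun p => decide (p.1.1 = 0 ∨ p.1.1 = rows - 1 ∨ p.1.2 = 0 ∨ p.1.2 = cols - 1)) = false := by
      rw [List.any_eq_false]
      intro p hp hpe
      have : p.2 + 1 ∈ LA := by
        rw [hLA]
        exact List.mem_map.mpr ⟨p, List.mem_filter.mpr ⟨hp, hpe⟩, rfl⟩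
      rw [hA] at this
      simp at this
    rw [hB, hany]
    rfl
  · have hany : D.items.any
        (fun p => decide (p.1.1 = 0 ∨ p.1.1 = rows - 1 ∨ p.1.2 = 0 ∨ p.1.2 = cols - 1)) = true := by
      rcases hLAc : LA with _ | ⟨b, t⟩
      · exact absurd hLAc hA
      · have hb : b ∈ LA := by rw [hLAc]; simp
        rw [hLA] at hb
        obtain ⟨p, hp, hpv⟩ := List.mem_map.mp hb
        obtain ⟨hp1, hp2⟩ := List.mem_filter.mp hp
        exact List.any_eq_true.mpr ⟨p, hp1, hp2⟩
    have hmax : LB.max? = some (LA.foldl max 0) := by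
      rw [max?_eq_of_mem_iff LB LA (fun v => (hmem v).symm)]
      exact max?_eq_foldl_zero LA hA hpos
    rw [hmax, hany]
    rfl

-- ---------- NEW: BFS final dict computes shortest distances ----------

lemma foldB_spec (maze : List String) (rows cols x y : Int) (d : Int) :
    ∀ (ns : List (Int × Int)) (q : List (Int × Int)) (D : KD),
    (∀ n ∈ ns, Adj (x, y) n) →
    D.contains (x, y) = true → D.getD (x, y) 0 = d →
    ∃ new : List (Int × Int),
      (ns.foldl (stepB maze rows cols x y) (q, D)).1 = q ++ new ∧
      (ns.foldl (stepB maze rows cols x y) (q, D)).2.items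
        = D.items ++ new.map (fun n => (n, d + 1)) ∧
      new.Nodup ∧
      (∀ n ∈ new, D.contains n = false ∧ Adj (x, y) n ∧ InGrid rows cols n ∧
          mazeAt maze n.1 n.2 = ' ') ∧
      (∀ c, D.contains c = true →
          (ns.foldl (stepB maze rows cols x y) (q, D)).2.get? c = D.get? c) ∧
      (∀ n ∈ ns, InGrid rows cols n → mazeAt maze n.1 n.2 = ' ' →
          (ns.foldl (stepB maze rows cols x y) (q, D)).2.contains n = true) ∧
      (∀ c, (ns.foldl (stepB maze rows cols x y) (q, D)).2.contains c = true ↔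
          (D.contains c = true ∨ c ∈ new)) ∧
      (∀ n ∈ new, (ns.foldl (stepB maze rows cols x y) (q, D)).2.getD n 0 = d + 1) := by
  intro ns
  induction ns with
  | nil =>
      intro q D _ _ _
      exact ⟨[], by simp, by simp, by simp, by simp, fun c _ => rfl, by simp,
        fun c => by simp, by simp⟩
  | cons n ns ih =>
      intro q D hadj hx hd
      simp only [List.foldl_cons, stepB]
      by_cases hb : 0 ≤ n.1 ∧ n.1 < rows ∧ 0 ≤ n.2 ∧ n.2 < cols ∧ D.contains n = false
      · rw [if_pos hb]
        by_cases hm : mazeAt maze n.1 n.2 = ' '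
        · rw [if_pos hm]
          have hne_xy : ((x, y) : Int × Int) ≠ n := by
            intro he
            rw [he, hb.2.2.2.2] at hx
            exact Bool.false_ne_true hx
          have hx' : (D.insert n (D.getD (x, y) 0 + 1)).contains (x, y) = true := by
            simp [PySem.Dict.contains_insert, hx]
          have hd' : (D.insert n (D.getD (x, y) 0 + 1)).getD (x, y) 0 = d := by
            rw [PySem.Dict.getD_insert_of_ne D _ _ hne_xy, hd]
          obtain ⟨new', e1, e2, e3, e4, e5, e6, e7, e8⟩ :=
            ih (q ++ [n]) (D.insert n (D.getD (x, y) 0 + 1))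
              (fun m hm' => hadj m (by simp [hm'])) hx' hd'
          have hcontD' : ∀ c : Int × Int,
              (D.insert n (D.getD (x, y) 0 + 1)).contains c = true ↔
                (D.contains c = true ∨ c = n) := by
            intro c
            simp only [PySem.Dict.contains_insert, Bool.or_eq_true, beq_iff_eq]
            exact or_comm
          refine ⟨n :: new', ?_, ?_, ?_, ?_, ?_, ?_, ?_, ?_⟩
          · rw [e1]
            simp
          · rw [e2, PySem.Dict.items_insert_of_not_contains D _ hb.2.2.2.2, hd]
            simp
          · refine List.nodup_cons.mpr ⟨?_, e3⟩
            intro hmem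
            have := (e4 n hmem).1
            rw [(hcontD' n).mpr (Or.inr rfl)] at this
            simp at this
          · intro p hp
            rcases List.mem_cons.mp hp with hp | hp
            · subst hp
              exact ⟨hb.2.2.2.2, hadj p (by simp), ⟨hb.1, hb.2.1, hb.2.2.1, hb.2.2.2.1⟩, hm⟩
            · obtain ⟨hc', ha', hg', hm'⟩ := e4 p hp
              refine ⟨?_, ha', hg', hm'⟩
              cases hcp : D.contains p with
              | false => rfl
              | true =>
                  rw [(hcontD' p).mpr (Or.inl hcp)] at hc'
                  exact absurd hc' (by simp)
          · intro c hc
            have hcn : c ≠ n := by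
              intro he
              rw [he, hb.2.2.2.2] at hc
              exact Bool.false_ne_true hc
            have h1 : (D.insert n (D.getD (x, y) 0 + 1)).get? c = D.get? c :=
              PySem.Dict.get?_insert_of_ne D _ hcn
            have h2 : (D.insert n (D.getD (x, y) 0 + 1)).contains c = true :=
              (hcontD' c).mpr (Or.inl hc)
            rw [e5 c h2, h1]
          · intro m hmem hg hsp
            rcases List.mem_cons.mp hmem with hmem | hmem
            · subst hmem
              have h2 : (D.insert m (D.getD (x, y) 0 + 1)).contains m = true :=
                PySem.Dict.contains_insert_self _ _ _
              rw [PySem.Dict.contains_eq_isSome_get?, e5 m h2,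
                ← PySem.Dict.contains_eq_isSome_get?]
              exact h2
            · exact e6 m hmem hg hsp
          · intro c
            rw [e7 c, hcontD' c]
            simp only [List.mem_cons]
            tauto
          · intro p hp
            rcases List.mem_cons.mp hp with hp | hp
            · subst hp
              have h2 : (D.insert p (D.getD (x, y) 0 + 1)).contains p = true :=
                PySem.Dict.contains_insert_self _ _ _
              rw [PySem.Dict.getD_eq_get?_getD, e5 p h2, ← PySem.Dict.getD_eq_get?_getD,
                PySem.Dict.getD_insert_self, hd]
            · exact e8 p hp
        · rw [if_neg hm]
          obtain ⟨new', e1, e2, e3, e4, e5, e6, e7, e8⟩ := ih q D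
            (fun m hm' => hadj m (by simp [hm'])) hx hd
          refine ⟨new', e1, e2, e3, e4, e5, ?_, e7, e8⟩
          intro m hmem hg hsp
          rcases List.mem_cons.mp hmem with hmem | hmem
          · subst hmem
            exact absurd hsp hm
          · exact e6 m hmem hg hsp
      · rw [if_neg hb]
        obtain ⟨new', e1, e2, e3, e4, e5, e6, e7, e8⟩ := ih q D
          (fun m hm' => hadj m (by simp [hm'])) hx hd
        refine ⟨new', e1, e2, e3, e4, e5, ?_, e7, e8⟩
        intro m hmem hg hsp
        rcases List.mem_cons.mp hmem with hmem | hmem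
        · subst hmem
          have hcm : D.contains m = true := by
            cases hcn : D.contains m with
            | true => rfl
            | false => exact absurd ⟨hg.1, hg.2.1, hg.2.2.1, hg.2.2.2, hcn⟩ hb
          rw [PySem.Dict.contains_eq_isSome_get?, e5 m hcm,
            ← PySem.Dict.contains_eq_isSome_get?]
          exact hcm
        · exact e6 m hmem hg hsp

lemma bfs_step (maze : List String) (rows cols : Int) (s : Int × Int) (x y : Int)
    (rest : List (Int × Int)) (D : KD)
    (hinv : BfsInv maze rows cols s ((x, y) :: rest) D) :
    BfsInv maze rows cols s
      ([(x - 1, y), (x + 1, y), (x, y - 1), (x, y + 1)].foldl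
        (stepB maze rows cols x y) (rest, D)).1
      ([(x - 1, y), (x + 1, y), (x, y - 1), (x, y + 1)].foldl
        (stepB maze rows cols x y) (rest, D)).2 := by
  obtain ⟨hq, hsound, hproc, hpair, hhead, hnd⟩ := hinv
  have hadj : ∀ n ∈ [(x - 1, y), (x + 1, y), (x, y - 1), (x, y + 1)], Adj (x, y) n :=
    fun n hn => hn
  have hxq : D.contains (x, y) = true := hq _ (by simp)
  obtain ⟨dv, hdv, hdv0, hdvR⟩ := contains_value maze rows cols s (x, y) D hsound hxq
  obtain ⟨new, e1, e2, e3, e4, e5, e6, e7, e8⟩ :=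
    foldB_spec maze rows cols x y (D.getD (x, y) 0)
      [(x - 1, y), (x + 1, y), (x, y - 1), (x, y + 1)] rest D hadj hxq rfl
  set r := [(x - 1, y), (x + 1, y), (x, y - 1), (x, y + 1)].foldl
    (stepB maze rows cols x y) (rest, D) with hr
  have hpresC : ∀ c, D.contains c = true → r.2.contains c = true := by
    intro c hc
    rw [PySem.Dict.contains_eq_isSome_get?, e5 c hc, ← PySem.Dict.contains_eq_isSome_get?]
    exact hc
  have hpresG : ∀ c, D.contains c = true → r.2.getD c 0 = D.getD c 0 := by
    intro c hc
    rw [PySem.Dict.getD_eq_get?_getD, e5 c hc, ← PySem.Dict.getD_eq_get?_getD]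
  have hrestD : ∀ c ∈ rest, D.contains c = true := fun c hc => hq c (by simp [hc])
  obtain ⟨h5a, h5b⟩ := hhead (x, y) rest rfl
  have hpair' : (D.getD (x, y) 0 :: rest.map (fun c => D.getD c 0)).Pairwise (· ≤ ·) := by
    simpa using hpair
  obtain ⟨hpair_hd, hpair_tl⟩ := List.pairwise_cons.mp hpair'
  have hd_le : ∀ c ∈ rest, D.getD (x, y) 0 ≤ D.getD c 0 := by
    intro c hc
    exact hpair_hd _ (List.mem_map.mpr ⟨c, hc, rfl⟩)
  have hrest_nd : rest.Nodup := (List.nodup_cons.mp hnd).2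
  have hx_notin : (x, y) ∉ rest := (List.nodup_cons.mp hnd).1
  have hnew_fresh : ∀ n ∈ new, D.contains n = false := fun n hn => (e4 n hn).1
  have hnew_notin_rest : ∀ n ∈ new, n ∉ rest := by
    intro n hn hmem
    have h1 := hnew_fresh n hn
    rw [hrestD n hmem] at h1
    exact absurd h1 (by simp)
  have hnew_getD : ∀ n ∈ new, r.2.getD n 0 = D.getD (x, y) 0 + 1 := e8
  refine ⟨?_, ?_, ?_, ?_, ?_, ?_⟩
  · -- inv1
    intro c hc
    rw [e1] at hc
    rcases List.mem_append.mp hc with hc | hc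
    · exact hpresC c (hrestD c hc)
    · exact (e7 c).mpr (Or.inr hc)
  · -- inv2 soundness
    intro p hp
    rw [e2] at hp
    rcases List.mem_append.mp hp with hp | hp
    · exact hsound p hp
    · obtain ⟨n, hn, hpn⟩ := List.mem_map.mp hp
      subst hpn
      obtain ⟨_, ha, hg, hm⟩ := e4 n hn
      refine ⟨by simp; omega, ?_⟩
      have htn : (D.getD (x, y) 0 + 1).toNat = dv.toNat + 1 := by omega
      simp only [htn]
      exact Reach.step hdvR ha hg hm
  · -- inv3 processed closure
    intro c hc hcq n hadj' hg hm
    rcases (e7 c).mp hc with hcD | hcnew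
    · by_cases hcxy : c = (x, y)
      · subst hcxy
        have hns : n ∈ [(x - 1, y), (x + 1, y), (x, y - 1), (x, y + 1)] := hadj'
        refine ⟨e6 n hns hg hm, ?_⟩
        rw [hpresG _ hxq]
        by_cases hn : n ∈ new
        · rw [hnew_getD n hn]
        · have hnD : D.contains n = true := by
            rcases (e7 n).mp (e6 n hns hg hm) with h | h
            · exact h
            · exact absurd h hn
          rw [hpresG n hnD]
          exact h5a n hnD
      · have hcold : c ∉ (x, y) :: rest := by
          intro hmem
          rcases List.mem_cons.mp hmem with h | h
          · exact hcxy h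
          · exact hcq (by rw [e1]; exact List.mem_append.mpr (Or.inl h))
        obtain ⟨hDn, hDle⟩ := hproc c hcD hcold n hadj' hg hm
        refine ⟨hpresC n hDn, ?_⟩
        rw [hpresG n hDn, hpresG c hcD]
        exact hDle
    · exact absurd (by rw [e1]; exact List.mem_append.mpr (Or.inr hcnew)) hcq
  · -- inv4 queue values nondecreasing
    rw [e1, List.map_append]
    have hmrest : rest.map (fun c => r.2.getD c 0) = rest.map (fun c => D.getD c 0) :=
      List.map_congr_left (fun c hc => hpresG c (hrestD c hc))
    refine List.pairwise_append.mpr ⟨?_, ?_, ?_⟩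
    · rw [hmrest]
      exact hpair_tl
    · refine List.pairwise_of_forall_mem_list ?_
      intro a ha b hb
      obtain ⟨na, hna, hva⟩ := List.mem_map.mp ha
      obtain ⟨nb, hnb, hvb⟩ := List.mem_map.mp hb
      rw [← hva, ← hvb, hnew_getD na hna, hnew_getD nb hnb]
    · intro a ha b hb
      obtain ⟨na, hna, hva⟩ := List.mem_map.mp ha
      obtain ⟨nb, hnb, hvb⟩ := List.mem_map.mp hb
      rw [← hva, ← hvb, hnew_getD nb hnb, hpresG na (hrestD na hna)]
      exact h5a na (hrestD na hna)
  · -- inv5 head bounds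
    intro c0 r0 heq
    have hmem_r1 : ∀ c : Int × Int, c ∈ rest ∨ c ∈ new → c ∈ r.1 := by
      intro c h
      rw [e1]
      exact List.mem_append.mpr h
    cases hrest : rest with
    | nil =>
        subst hrest
        have hnew_eq : new = c0 :: r0 := by
          rw [e1] at heq
          simpa using heq
        have hc0new : c0 ∈ new := by rw [hnew_eq]; simp
        have hc0v : r.2.getD c0 0 = D.getD (x, y) 0 + 1 := hnew_getD c0 hc0new
        constructor
        · intro c hc
          rw [hc0v]
          rcases (e7 c).mp hc with hcD | hcnew
          · have := h5a c hcD
            rw [hpresG c hcD]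
            omega
          · rw [hnew_getD c hcnew]
            omega
        · intro c hc hcq
          rw [hc0v]
          rcases (e7 c).mp hc with hcD | hcnew
          · by_cases hcxy : c = (x, y)
            · subst hcxy
              rw [hpresG _ hxq]
              omega
            · have hcold : c ∉ (x, y) :: ([] : List (Int × Int)) := by simp [hcxy]
              have := h5b c hcD hcold
              rw [hpresG c hcD]
              omega
          · exact absurd (heq ▸ hmem_r1 c (Or.inr hcnew)) hcq
    | cons c0' r0' =>
        subst hrest
        have hcons : c0' :: (r0' ++ new) = c0 :: r0 := by
          rw [← heq, e1]
          simp
        have hc0 : c0 = c0' := ((List.cons.injEq _ _ _ _).mp hcons).1.symm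
        subst hc0
        have hc0D : D.contains c0 = true := hrestD c0 (by simp)
        have hc0v : r.2.getD c0 0 = D.getD c0 0 := hpresG c0 hc0D
        have hdle0 : D.getD (x, y) 0 ≤ D.getD c0 0 := hd_le c0 (by simp)
        constructor
        · intro c hc
          rw [hc0v]
          rcases (e7 c).mp hc with hcD | hcnew
          · have := h5a c hcD
            rw [hpresG c hcD]
            omega
          · rw [hnew_getD c hcnew]
            omega
        · intro c hc hcq
          rw [hc0v]
          rcases (e7 c).mp hc with hcD | hcnew
          · by_cases hcxy : c = (x, y)
            · subst hcxy
              rw [hpresG _ hxq]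
              omega
            · have hcrest : c ∉ (c0 :: r0') := by
                intro hmem
                exact hcq (heq ▸ hmem_r1 c (Or.inl hmem))
              have hcold : c ∉ (x, y) :: c0 :: r0' := by
                intro hmem
                rcases List.mem_cons.mp hmem with h | h
                · exact hcxy h
                · exact hcrest h
              have := h5b c hcD hcold
              rw [hpresG c hcD]
              omega
          · exact absurd (heq ▸ hmem_r1 c (Or.inr hcnew)) hcq
  · -- inv6 nodup
    rw [e1]
    refine List.Nodup.append hrest_nd e3 ?_
    intro a ha hb
    have h1 := hnew_fresh a hb
    rw [hrestD a ha] at h1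
    exact absurd h1 (by simp)

lemma loopB_char (maze : List String) (rows cols : Int) (s : Int × Int) :
    ∀ (fuel : Nat) (q : List (Int × Int)) (D : KD),
    BfsInv maze rows cols s q D → GoodDict rows cols D →
    q.length + (rows.toNat * cols.toNat - D.items.length) < fuel →
    (∀ p ∈ (loopB maze rows cols fuel q D).items,
        0 ≤ p.2 ∧ Reach maze rows cols s p.2.toNat p.1) ∧
    (∀ c, (loopB maze rows cols fuel q D).contains c = true → ∀ n, Adj c n →
        InGrid rows cols n → mazeAt maze n.1 n.2 = ' ' →
        (loopB maze rows cols fuel q D).contains n = true ∧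
        (loopB maze rows cols fuel q D).getD n 0 ≤ (loopB maze rows cols fuel q D).getD c 0 + 1) ∧
    (∀ c, D.contains c = true → (loopB maze rows cols fuel q D).get? c = D.get? c) := by
  intro fuel
  induction fuel with
  | zero =>
      intro q D hinv hgood hfuel
      omega
  | succ fuel ih =>
      intro q D hinv hgood hfuel
      cases q with
      | nil =>
          simp only [loopB]
          refine ⟨hinv.2.1, ?_, ?_⟩
          · intro c hc n ha hg hm
            exact hinv.2.2.1 c hc (by simp) n ha hg hm
          · intro c _
            trivial
      | cons c rest =>
          obtain ⟨x, y⟩ := c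
          simp only [loopB]
          obtain ⟨new, h1, h2, h3⟩ := foldB_items maze rows cols x y
            [(x - 1, y), (x + 1, y), (x, y - 1), (x, y + 1)] rest D
          have hinv' := bfs_step maze rows cols s x y rest D hinv
          have hgood' : GoodDict rows cols
              ([(x - 1, y), (x + 1, y), (x, y - 1), (x, y + 1)].foldl
                (stepB maze rows cols x y) (rest, D)).2 :=
            foldB_good maze rows cols x y _ rest D hgood
          set qd := [(x - 1, y), (x + 1, y), (x, y - 1), (x, y + 1)].foldl
            (stepB maze rows cols x y) (rest, D) with hqd
          have hlen' : qd.2.items.length = D.items.length + new.length := by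
            rw [h2, List.length_append]
          have hNbound : qd.2.items.length ≤ rows.toNat * cols.toNat :=
            card_bound rows cols qd.2 hgood'.1 hgood'.2.1
          have hfuel' : qd.1.length + (rows.toNat * cols.toNat - qd.2.items.length) < fuel := by
            have hq1 : qd.1.length = rest.length + new.length := by
              rw [h1, List.length_append, List.length_map]
            simp only [List.length_cons] at hfuel
            omega
          have IH := ih qd.1 qd.2 hinv' hgood' hfuel'
          refine ⟨IH.1, IH.2.1, ?_⟩
          intro c hc
          have hc' : qd.2.contains c = true := by
            rw [PySem.Dict.contains_eq_isSome_get?, h3 c hc,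
              ← PySem.Dict.contains_eq_isSome_get?]
            exact hc
          rw [IH.2.2 c hc', h3 c hc]

lemma closure_complete (maze : List String) (rows cols : Int) (s : Int × Int) (D : KD)
    (hs : D.get? s = some 0)
    (hcl : ∀ c, D.contains c = true → ∀ n, Adj c n → InGrid rows cols n →
        mazeAt maze n.1 n.2 = ' ' → D.contains n = true ∧ D.getD n 0 ≤ D.getD c 0 + 1) :
    ∀ (k : Nat) (c : Int × Int), Reach maze rows cols s k c →
      D.contains c = true ∧ D.getD c 0 ≤ (k : Int) := by
  intro k c h
  induction h with
  | refl =>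
      constructor
      · rw [PySem.Dict.contains_eq_isSome_get?, hs]
        rfl
      · rw [PySem.Dict.getD_eq_get?_getD, hs]
        simp
  | step hr ha hg hm ih =>
      obtain ⟨hc, hle⟩ := ih
      obtain ⟨hcn, hlen⟩ := hcl _ hc _ ha hg hm
      refine ⟨hcn, ?_⟩
      push_cast
      omega

-- ---------- NEW: relaxation sweep machinery ----------

lemma sweepFold_spec (maze : List String) (old : KD) :
    ∀ (cells : List (Int × Int)) (acc : KD),
    cells.Nodup →
    (∀ c ∈ cells, acc.contains c = true → old.contains c = true) →
    ∃ L : List ((Int × Int) × Int),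
      (cells.foldl (sweepCell maze old) acc).items = acc.items ++ L ∧
      (∀ p ∈ L, p.1 ∈ cells ∧ old.contains p.1 = false ∧ mazeAt maze p.1.1 p.1.2 = ' ' ∧
         ∃ m, PySem.List.min? ((neighOf p.1.1 p.1.2).filterMap (fun n => old.get? n))
            (fun v => v) = some m ∧ p.2 = m + 1) ∧
      (L.map Prod.fst).Nodup ∧
      (∀ p ∈ L, acc.contains p.1 = false) ∧
      (∀ c, acc.contains c = true →
          (cells.foldl (sweepCell maze old) acc).get? c = acc.get? c) ∧
      (∀ c ∈ cells, old.contains c = false → mazeAt maze c.1 c.2 = ' ' →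
          ((neighOf c.1 c.2).filterMap (fun n => old.get? n)) ≠ [] →
          (cells.foldl (sweepCell maze old) acc).contains c = true) ∧
      (∀ c, (cells.foldl (sweepCell maze old) acc).contains c = true ↔
          (acc.contains c = true ∨ c ∈ L.map Prod.fst)) := by
  intro cells
  induction cells with
  | nil =>
      intro acc _ _
      exact ⟨[], by simp, by simp, by simp, by simp, fun c _ => rfl, by simp,
        fun c => by simp⟩
  | cons c cells ih =>
      intro acc hnodup hsub
      obtain ⟨hnd_c, hnd_t⟩ := List.nodup_cons.mp hnodup
      simp only [List.foldl_cons, sweepCell]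
      by_cases hg : old.contains c = false ∧ mazeAt maze c.1 c.2 = ' '
      · rw [if_pos hg]
        cases hmin : PySem.List.min?
            ((neighOf c.1 c.2).filterMap (fun n => old.get? n)) (fun v => v) with
        | some m =>
            have haccc : acc.contains c = false := by
              cases hcc : acc.contains c with
              | false => rfl
              | true =>
                  have := hsub c (by simp) hcc
                  rw [hg.1] at this
                  exact absurd this (by simp)
            have hsub' : ∀ c' ∈ cells, (acc.insert c (m + 1)).contains c' = true →
                old.contains c' = true := by
              intro c' hc' hcc'
              have hcne : c' ≠ c := fun he => hnd_c (he ▸ hc')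
              rw [PySem.Dict.contains_insert] at hcc'
              rcases Bool.or_eq_true_iff.mp hcc' with h | h
              · exact absurd (beq_iff_eq.mp h) hcne
              · exact hsub c' (by simp [hc']) h
            obtain ⟨L', f1, f2, f3, f4, f5, f6, f7⟩ := ih (acc.insert c (m + 1)) hnd_t hsub'
            have hca : ∀ z : Int × Int, (acc.insert c (m + 1)).contains z = true ↔
                (acc.contains z = true ∨ z = c) := by
              intro z
              simp only [PySem.Dict.contains_insert, Bool.or_eq_true, beq_iff_eq]
              exact or_comm
            refine ⟨(c, m + 1) :: L', ?_, ?_, ?_, ?_, ?_, ?_, ?_⟩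
            · rw [f1, PySem.Dict.items_insert_of_not_contains acc _ haccc]
              simp
            · intro p hp
              rcases List.mem_cons.mp hp with hp | hp
              · subst hp
                exact ⟨by simp, hg.1, hg.2, m, hmin, rfl⟩
              · obtain ⟨hp1, hp2, hp3, hp4⟩ := f2 p hp
                exact ⟨by simp [hp1], hp2, hp3, hp4⟩
            · refine List.nodup_cons.mpr ⟨?_, f3⟩
              intro hmem
              obtain ⟨p, hp, hpc⟩ := List.mem_map.mp hmem
              have h1 := f4 p hp
              rw [hpc, (hca c).mpr (Or.inr rfl)] at h1
              simp at h1
            · intro p hp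
              rcases List.mem_cons.mp hp with hp | hp
              · subst hp
                exact haccc
              · have h1 := f4 p hp
                cases hcc : acc.contains p.1 with
                | false => rfl
                | true =>
                    rw [(hca p.1).mpr (Or.inl hcc)] at h1
                    simp at h1
            · intro z hz
              have hzne : z ≠ c := by
                intro he
                rw [he, haccc] at hz
                exact Bool.false_ne_true hz
              have h1 : (acc.insert c (m + 1)).get? z = acc.get? z :=
                PySem.Dict.get?_insert_of_ne acc _ hzne
              rw [f5 z ((hca z).mpr (Or.inl hz)), h1]
            · intro z hz hold hmaze hne
              rcases List.mem_cons.mp hz with hz | hz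
              · subst hz
                have h2 : (acc.insert z (m + 1)).contains z = true :=
                  PySem.Dict.contains_insert_self _ _ _
                rw [PySem.Dict.contains_eq_isSome_get?, f5 z h2,
                  ← PySem.Dict.contains_eq_isSome_get?]
                exact h2
              · exact f6 z hz hold hmaze hne
            · intro z
              rw [f7 z, hca z]
              simp only [List.map_cons, List.mem_cons]
              tauto
        | none =>
            obtain ⟨L', f1, f2, f3, f4, f5, f6, f7⟩ := ih acc hnd_t
              (fun c' hc' => hsub c' (by simp [hc']))
            refine ⟨L', f1, ?_, f3, f4, f5, ?_, f7⟩
            · intro p hp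
              obtain ⟨hp1, hp2, hp3, hp4⟩ := f2 p hp
              exact ⟨by simp [hp1], hp2, hp3, hp4⟩
            · intro z hz hold hmaze hne
              rcases List.mem_cons.mp hz with hz | hz
              · subst hz
                exact absurd ((PySem.List.min?_eq_none_iff _ _).mp hmin) hne
              · exact f6 z hz hold hmaze hne
      · rw [if_neg hg]
        obtain ⟨L', f1, f2, f3, f4, f5, f6, f7⟩ := ih acc hnd_t
          (fun c' hc' => hsub c' (by simp [hc']))
        refine ⟨L', f1, ?_, f3, f4, f5, ?_, f7⟩
        · intro p hp
          obtain ⟨hp1, hp2, hp3, hp4⟩ := f2 p hp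
          exact ⟨by simp [hp1], hp2, hp3, hp4⟩
        · intro z hz hold hmaze hne
          rcases List.mem_cons.mp hz with hz | hz
          · subst hz
            exact absurd ⟨hold, hmaze⟩ hg
          · exact f6 z hz hold hmaze hne

lemma foldl_flatMap_fold {α β γ : Type} (l : List α) (g : α → List β) (f : γ → β → γ) (a : γ) :
    (l.flatMap g).foldl f a = l.foldl (fun acc x => (g x).foldl f acc) a := by
  induction l generalizing a with
  | nil => simp
  | cons x t ih => simp [List.foldl_append, ih]

lemma sweep_eq_cells (maze : List String) (rows cols : Int) (old : KD) :
    sweep maze rows cols old = (gridCells rows cols).foldl (sweepCell maze old) old := by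
  simp only [sweep, gridCells]
  rw [foldl_flatMap_fold]
  simp only [List.foldl_map]

lemma mem_gridCells (rows cols : Int) (c : Int × Int) :
    c ∈ gridCells rows cols ↔ InGrid rows cols c := by
  obtain ⟨a, b⟩ := c
  simp only [gridCells, List.mem_flatMap, List.mem_map, PySem.List.mem_pyRange_one,
    InGrid, Prod.mk.injEq]
  constructor
  · rintro ⟨x, ⟨hx1, hx2⟩, y, ⟨hy1, hy2⟩, h1, h2⟩
    subst h1
    subst h2
    exact ⟨hx1, hx2, hy1, hy2⟩
  · rintro ⟨h1, h2, h3, h4⟩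
    exact ⟨a, ⟨h1, h2⟩, b, ⟨h3, h4⟩, rfl, rfl⟩

lemma nodup_pairs (xs ys : List Int) (hx : xs.Nodup) (hy : ys.Nodup) :
    (xs.flatMap (fun x => ys.map (fun y => ((x : Int), y)))).Nodup := by
  induction xs with
  | nil => simp
  | cons x t ih =>
      obtain ⟨hxn, htn⟩ := List.nodup_cons.mp hx
      simp only [List.flatMap_cons]
      refine List.Nodup.append ?_ (ih htn) ?_
      · exact hy.map (fun a b h => (Prod.ext_iff.mp h).2)
      · intro p hp hq
        obtain ⟨y0, _, hpy⟩ := List.mem_map.mp hp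
        obtain ⟨x', hx', hmem⟩ := List.mem_flatMap.mp hq
        obtain ⟨y1, _, hpy1⟩ := List.mem_map.mp hmem
        have hxx : x = x' := by
          rw [← hpy] at hpy1
          exact (Prod.ext_iff.mp hpy1).1.symm
        exact hxn (hxx ▸ hx')

lemma nodup_gridCells (rows cols : Int) : (gridCells rows cols).Nodup :=
  nodup_pairs _ _ (PySem.List.nodup_pyRange_one 0 rows) (PySem.List.nodup_pyRange_one 0 cols)

lemma relChar_sweep (maze : List String) (rows cols : Int) (s : Int × Int)
    (hsns : mazeAt maze s.1 s.2 ≠ ' ') (k : Nat) (D : KD)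
    (hchar : RelChar maze rows cols s k D) (hnd : D.keys.Nodup)
    (hgrid : ∀ c ∈ D.keys, InGrid rows cols c) :
    RelChar maze rows cols s (k + 1) (sweep maze rows cols D) ∧
    (sweep maze rows cols D).keys.Nodup ∧
    (∀ c ∈ (sweep maze rows cols D).keys, InGrid rows cols c) ∧
    ∃ L, (sweep maze rows cols D).items = D.items ++ L := by
  obtain ⟨hciff, hcval⟩ := hchar
  obtain ⟨L, e1, e2, e3, e4, e5, e6, e7⟩ :=
    sweepFold_spec maze D (gridCells rows cols) D (nodup_gridCells rows cols)
      (fun c _ h => h)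
  rw [sweep_eq_cells]
  -- every new entry carries the exact shortest distance, which is k + 1 at most
  have F1 : ∀ p ∈ L, ∃ dd : Nat, p.2 = (dd : Int) ∧
      IsDist maze rows cols s p.1 dd ∧ dd ≤ k + 1 := by
    intro p hp
    obtain ⟨hmemcells, holdf, hmaze, m, hmin, hval⟩ := e2 p hp
    have hInGrid : InGrid rows cols p.1 := (mem_gridCells rows cols p.1).mp hmemcells
    have hm_mem := PySem.List.min?_mem hmin
    obtain ⟨n0, hn0mem, hn0get⟩ := List.mem_filterMap.mp hm_mem
    obtain ⟨d0, hd0p, hIsD0⟩ := hcval (n0, m) (PySem.Dict.mem_items_of_get?_eq_some _ hn0get)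
    have hd0 : m = (d0 : Int) := hd0p
    have hd0k : d0 ≤ k := by
      have hc0 : D.contains n0 = true := by
        rw [PySem.Dict.contains_eq_isSome_get?, hn0get]
        rfl
      obtain ⟨d', hd'k, hIsD'⟩ := (hciff n0).mp hc0
      rw [isDist_unique maze rows cols s n0 d0 d' hIsD0 hIsD']
      exact hd'k
    have hReach : Reach maze rows cols s (d0 + 1) p.1 :=
      Reach.step hIsD0.1 (adj_symm p.1 n0 hn0mem) hInGrid hmaze
    refine ⟨d0 + 1, ?_, ⟨hReach, ?_⟩, by omega⟩
    · rw [hval, hd0]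
      push_cast
      ring
    · intro j hj
      by_contra hlt
      push_cast at hlt
      have hjle : j ≤ d0 := by omega
      cases j with
      | zero =>
          have := reach_zero maze rows cols s p.1 hj
          rw [this] at hmaze
          exact hsns hmaze
      | succ i =>
          obtain ⟨q0, hq0R, hq0adj, _, _⟩ := reach_succ_inv maze rows cols s p.1 i hj
          obtain ⟨dq, hIsDq, hdq_le⟩ := exists_isDist maze rows cols s q0 i hq0R
          have hq0c : D.contains q0 = true := (hciff q0).mpr ⟨dq, by omega, hIsDq⟩
          rw [PySem.Dict.contains_eq_isSome_get?] at hq0c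
          obtain ⟨v, hv⟩ := Option.isSome_iff_exists.mp hq0c
          obtain ⟨dq', hdq'p, hIsDq'⟩ := hcval (q0, v) (PySem.Dict.mem_items_of_get?_eq_some _ hv)
          have hdq' : v = (dq' : Int) := hdq'p
          have hdqq : dq' = dq := isDist_unique maze rows cols s q0 dq' dq hIsDq' hIsDq
          have hmem_around : ((dq : Nat) : Int) ∈
              (neighOf p.1.1 p.1.2).filterMap (fun n => D.get? n) := by
            refine List.mem_filterMap.mpr ⟨q0, adj_symm q0 p.1 hq0adj, ?_⟩
            rw [hv, hdq', hdqq]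
          have := PySem.List.min?_isMin hmin _ hmem_around
          simp only at this
          rw [hd0] at this
          have : d0 ≤ dq := by exact_mod_cast this
          omega
  refine ⟨⟨?_, ?_⟩, ?_, ?_, ⟨L, e1⟩⟩
  · -- contains iff at k + 1
    intro c
    rw [e7 c]
    constructor
    · rintro (hc | hc)
      · obtain ⟨d, hdk, hIsD⟩ := (hciff c).mp hc
        exact ⟨d, by omega, hIsD⟩
      · obtain ⟨p, hp, hpc⟩ := List.mem_map.mp hc
        obtain ⟨dd, _, hIsD, hddk⟩ := F1 p hp
        exact ⟨dd, hddk, hpc ▸ hIsD⟩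
    · rintro ⟨d, hdk1, hIsD⟩
      by_cases hdk : d ≤ k
      · exact Or.inl ((hciff c).mpr ⟨d, hdk, hIsD⟩)
      · have hdkk : d = k + 1 := by omega
        by_cases hcD : D.contains c = true
        · exact Or.inl hcD
        · have hcf : D.contains c = false := by
            cases hb : D.contains c
            · rfl
            · exact absurd hb hcD
          have hR : Reach maze rows cols s (k + 1) c := hdkk ▸ hIsD.1
          obtain ⟨p0, hp0R, hp0adj, hgc, hmc⟩ := reach_succ_inv maze rows cols s c k hR
          obtain ⟨dp, hIsDp, hdp_le⟩ := exists_isDist maze rows cols s p0 k hp0R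
          have hp0c : D.contains p0 = true := (hciff p0).mpr ⟨dp, hdp_le, hIsDp⟩
          rw [PySem.Dict.contains_eq_isSome_get?] at hp0c
          obtain ⟨v, hv⟩ := Option.isSome_iff_exists.mp hp0c
          have hne : (neighOf c.1 c.2).filterMap (fun n => D.get? n) ≠ [] := by
            have : v ∈ (neighOf c.1 c.2).filterMap (fun n => D.get? n) :=
              List.mem_filterMap.mpr ⟨p0, adj_symm p0 c hp0adj, hv⟩
            exact List.ne_nil_of_mem this
          have := e6 c ((mem_gridCells rows cols c).mpr hgc) hcf hmc hne
          exact (e7 c).mp this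
  · -- values
    intro p hp
    rw [e1] at hp
    rcases List.mem_append.mp hp with hp | hp
    · exact hcval p hp
    · obtain ⟨dd, hv, hIsD, _⟩ := F1 p hp
      exact ⟨dd, hv, hIsD⟩
  · -- nodup keys
    have hnd' : (D.items.map Prod.fst).Nodup := by
      simpa [PySem.Dict.keys] using hnd
    have e3' : (L.map Prod.fst).Nodup := e3
    simp only [PySem.Dict.keys, e1, List.map_append]
    refine List.Nodup.append hnd' e3' ?_
    intro z hz hzL
    obtain ⟨p, hp, hpz⟩ := List.mem_map.mp hzL
    have h1 := e4 p hp
    have h2 : D.contains z = true := by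
      apply (PySem.Dict.contains_iff_mem_keys D z).mpr
      simpa [PySem.Dict.keys] using hz
    rw [hpz, h2] at h1
    exact absurd h1 (by simp)
  · -- keys in-grid
    intro c hc
    have hc' : c ∈ (D.items ++ L).map Prod.fst := by
      simpa [PySem.Dict.keys, e1] using hc
    rw [List.map_append] at hc'
    rcases List.mem_append.mp hc' with h | h
    · exact hgrid c (by simpa [PySem.Dict.keys] using h)
    · obtain ⟨p, hp, hpc⟩ := List.mem_map.mp h
      exact (mem_gridCells rows cols c).mp (hpc ▸ (e2 p hp).1)

lemma fixpoint_complete (maze : List String) (rows cols : Int) (s : Int × Int)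
    (k : Nat) (D : KD) (hchar : RelChar maze rows cols s k D)
    (hfix : sweep maze rows cols D = D) :
    ∀ (j : Nat) (c : Int × Int), Reach maze rows cols s j c → D.contains c = true := by
  intro j
  induction j with
  | zero =>
      intro c hR
      rw [reach_zero maze rows cols s c hR]
      exact (hchar.1 s).mpr ⟨0, Nat.zero_le k, isDist_start maze rows cols s⟩
  | succ j ihj =>
      intro c hR
      by_cases hc0 : D.contains c = true
      · exact hc0
      · have hc : D.contains c = false := by
          cases hb : D.contains c
          · rfl
          · exact absurd hb hc0
        obtain ⟨p0, hp0R, hp0adj, hgc, hmc⟩ := reach_succ_inv maze rows cols s c j hR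
        have hp0 : D.contains p0 = true := ihj p0 hp0R
        rw [PySem.Dict.contains_eq_isSome_get?] at hp0
        obtain ⟨v, hv⟩ := Option.isSome_iff_exists.mp hp0
        have hne : (neighOf c.1 c.2).filterMap (fun n => D.get? n) ≠ [] :=
          List.ne_nil_of_mem
            (List.mem_filterMap.mpr ⟨p0, adj_symm p0 c hp0adj, hv⟩)
        obtain ⟨L, e1, e2, e3, e4, e5, e6, e7⟩ :=
          sweepFold_spec maze D (gridCells rows cols) D (nodup_gridCells rows cols)
            (fun c' _ h => h)
        have := e6 c ((mem_gridCells rows cols c).mpr hgc) hc hmc hne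
        rw [← sweep_eq_cells, hfix] at this
        exact this

lemma relax_loop_char (maze : List String) (rows cols : Int) (s : Int × Int)
    (hsns : mazeAt maze s.1 s.2 ≠ ' ') :
    ∀ (fuel : Nat) (k : Nat) (D : KD),
    RelChar maze rows cols s k D → D.keys.Nodup →
    (∀ c ∈ D.keys, InGrid rows cols c) →
    rows.toNat * cols.toNat + 1 ≤ fuel + D.items.length →
    (∀ (j : Nat) (c : Int × Int), Reach maze rows cols s j c →
        (relaxLoop maze rows cols fuel D).contains c = true) ∧
    (∀ p ∈ (relaxLoop maze rows cols fuel D).items,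
        ∃ dd : Nat, p.2 = (dd : Int) ∧ IsDist maze rows cols s p.1 dd) ∧
    (relaxLoop maze rows cols fuel D).keys.Nodup := by
  intro fuel
  induction fuel with
  | zero =>
      intro k D hchar hnd hgrid hfuel
      have := card_bound rows cols D hnd hgrid
      omega
  | succ fuel ih =>
      intro k D hchar hnd hgrid hfuel
      simp only [relaxLoop]
      by_cases hfix : sweep maze rows cols D = D
      · rw [if_pos hfix]
        exact ⟨fixpoint_complete maze rows cols s k D hchar hfix,
          hchar.2, hnd⟩
      · rw [if_neg hfix]
        obtain ⟨hchar', hnd', hgrid', L, hitems⟩ :=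
          relChar_sweep maze rows cols s hsns k D hchar hnd hgrid
        have hLne : L ≠ [] := by
          intro hL
          apply hfix
          apply PySem.Dict.ext
          rw [hitems, hL]
          simp
        have hlen : (sweep maze rows cols D).items.length = D.items.length + L.length := by
          rw [hitems, List.length_append]
        have hL1 : 1 ≤ L.length := by
          cases L with
          | nil => exact absurd rfl hLne
          | cons _ _ => simp
        exact ih (k + 1) (sweep maze rows cols D) hchar' hnd' hgrid' (by omega)

-- ===== VERDICT (by name: the statement is the Claim_ definition above) =====
theorem kate_escape_spec : Claim_equal_kate_escape := by
  intro maze _hdom hpre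
  obtain ⟨hne, hrect⟩ := hpre
  unfold Spec_kate_escape
  simp only [kate_escape, kate_escape_alt, find_kate_in_maze]
  rw [← findKate_eq maze 0]
  cases hfk : findKateAux maze 0 with
  | none => simp
  | some s =>
      obtain ⟨sr, sc⟩ := s
      dsimp only
      obtain ⟨hsr0, hsrlen, hsc0, row, hrow, hsclen, hk⟩ := findKateAux_spec maze 0 sr sc hfk
      simp only [Int.sub_zero] at hsrlen hrow
      have hkmem : 'k' ∈ row.toList := List.mem_of_getElem? hk
      have hrowmem : row ∈ maze := List.mem_of_getElem? hrow
      have hrect' := hrect ⟨row, hrowmem, hkmem⟩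
      have hrowlen : row.toList.length = (maze.headD "").toList.length := hrect' row hrowmem
      have hc0 : 0 < (maze.headD "").toList.length := by omega
      have hr0 : 0 < maze.length := List.length_pos_iff.mpr hne
      have hr : (0 : Int) < (maze.length : Int) := by exact_mod_cast hr0
      have hc : (0 : Int) < ((maze.headD "").toList.length : Int) := by exact_mod_cast hc0
      have hgrid : InGrid (maze.length : Int) ((maze.headD "").toList.length : Int) (sr, sc) := by
        refine ⟨hsr0, by omega, hsc0, by omega⟩
      -- Kate's cell holds 'k', hence is not a ' ' cell
      have hpg1 : PySem.List.pyGet? maze sr = some row := by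
        rw [show sr = ((sr.toNat : Nat) : Int) from (Int.toNat_of_nonneg hsr0).symm,
          PySem.List.pyGet?_natCast]
        exact hrow
      have hpg2 : PySem.List.pyGet? row.toList sc = some 'k' := by
        rw [show sc = ((sc.toNat : Nat) : Int) from (Int.toNat_of_nonneg hsc0).symm,
          PySem.List.pyGet?_natCast]
        exact hk
      have hks : mazeAt maze sr sc = 'k' := by
        simp [mazeAt, hpg1, hpg2]
      have hsns : mazeAt maze ((sr, sc) : Int × Int).1 ((sr, sc) : Int × Int).2 ≠ ' ' := by
        rw [hks]
        decide
      have hitems0 : (PySem.Dict.empty.insert ((sr, sc) : Int × Int) (0 : Int)).items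
          = [((sr, sc), 0)] := by
        rw [PySem.Dict.items_insert_of_not_contains _ _ (PySem.Dict.contains_empty _)]
        rfl
      have hkeys0 : (PySem.Dict.empty.insert ((sr, sc) : Int × Int) (0 : Int)).keys
          = [(sr, sc)] := by
        simp [PySem.Dict.keys, hitems0]
      have hcont0 : ∀ c : Int × Int,
          (PySem.Dict.empty.insert ((sr, sc) : Int × Int) (0 : Int)).contains c = true
            ↔ c = (sr, sc) := by
        intro c
        rw [PySem.Dict.contains_eq_isSome_get?]
        cases hg : (PySem.Dict.empty.insert ((sr, sc) : Int × Int) (0 : Int)).get? c with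
        | none =>
            simp only [Option.isSome_none]
            constructor
            · intro h
              exact absurd h (by simp)
            · intro h
              subst h
              have : ((sr, sc), (0 : Int)) ∈
                  (PySem.Dict.empty.insert ((sr, sc) : Int × Int) (0 : Int)).items := by
                rw [hitems0]
                simp
              have h2 := PySem.Dict.get?_of_mem_items _ this (by rw [hkeys0]; simp)
              rw [hg] at h2
              exact absurd h2 (by simp)
        | some v =>
            simp only [Option.isSome_some]
            constructor
            · intro _
              have := PySem.Dict.mem_items_of_get?_eq_some _ hg
              rw [hitems0] at this
              simp at this
              exact this.1
            · intro _
              trivial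
      have hgood0 : GoodDict (maze.length : Int) ((maze.headD "").toList.length : Int)
          (PySem.Dict.empty.insert ((sr, sc) : Int × Int) (0 : Int)) := by
        refine ⟨by rw [hkeys0]; simp, ?_, ?_⟩
        · intro k hkk
          rw [hkeys0] at hkk
          simp at hkk
          subst hkk
          exact hgrid
        · intro p hp
          rw [hitems0, List.mem_singleton] at hp
          rw [hp]
      have hget?0 : (PySem.Dict.empty.insert ((sr, sc) : Int × Int) (0 : Int)).get? (sr, sc)
          = some 0 :=
        PySem.Dict.get?_of_mem_items _ (by rw [hitems0]; simp) (by rw [hkeys0]; simp)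
      have hgetD0 : (PySem.Dict.empty.insert ((sr, sc) : Int × Int) (0 : Int)).getD (sr, sc) 0
          = 0 := by
        rw [PySem.Dict.getD_eq_get?_getD, hget?0]
        rfl
      have hq0 : ∀ c ∈ ([((sr, sc) : Int × Int)]), (PySem.Dict.empty.insert
          ((sr, sc) : Int × Int) (0 : Int)).contains c = true := by
        intro c hcq
        simp at hcq
        subst hcq
        exact PySem.Dict.contains_insert_self _ _ _
      have hvis0 : ∀ c : Int × Int, c ∈ PySem.Set.add PySem.Set.empty ((sr, sc) : Int × Int)
          ↔ (PySem.Dict.empty.insert ((sr, sc) : Int × Int) (0 : Int)).contains c = true := by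
        intro c
        rw [PySem.Set.mem_add]
        simp [PySem.Dict.contains_insert, PySem.Dict.contains_empty, PySem.Set.empty]
      have hannot : ([((sr : Int), (sc : Int), (0 : Int))])
          = [((sr, sc) : Int × Int)].map (annotC (PySem.Dict.empty.insert
            ((sr, sc) : Int × Int) (0 : Int))) := by
        simp [annotC, PySem.Dict.getD_insert_self]
      rw [hannot, lockstep maze _ _ _ _ _ _ _ _ hq0 hvis0]
      have hfuel : ([((sr, sc) : Int × Int)]).length
          + ((maze.length : Int).toNat * (((maze.headD "").toList.length : Int)).toNat
            - (PySem.Dict.empty.insert ((sr, sc) : Int × Int) (0 : Int)).items.length)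
          < maze.length * (maze.headD "").toList.length + 1 := by
        rw [hitems0]
        simp only [List.length_singleton, Int.toNat_natCast]
        have : 1 ≤ maze.length * (maze.headD "").toList.length := by
          exact Nat.one_le_iff_ne_zero.mpr (Nat.mul_ne_zero (by omega) (by omega))
        omega
      rw [trace_eq maze _ _ _ _ _ hgood0 hq0 hfuel]
      obtain ⟨t, ht⟩ := loopB_items_prefix maze (maze.length : Int)
        (((maze.headD "").toList.length : Int)) (maze.length * (maze.headD "").toList.length + 1)
        [((sr, sc) : Int × Int)] (PySem.Dict.empty.insert ((sr, sc) : Int × Int) (0 : Int))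
      rw [hitems0] at ht
      have htrace : ([((sr, sc) : Int × Int)]).map
            (fun c => (c, (PySem.Dict.empty.insert ((sr, sc) : Int × Int) (0 : Int)).getD c 0))
          ++ ((loopB maze (maze.length : Int) (((maze.headD "").toList.length : Int))
              (maze.length * (maze.headD "").toList.length + 1) [((sr, sc) : Int × Int)]
              (PySem.Dict.empty.insert ((sr, sc) : Int × Int) (0 : Int))).items.drop
            (PySem.Dict.empty.insert ((sr, sc) : Int × Int) (0 : Int)).items.length)
          = (loopB maze (maze.length : Int) (((maze.headD "").toList.length : Int))
              (maze.length * (maze.headD "").toList.length + 1) [((sr, sc) : Int × Int)]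
              (PySem.Dict.empty.insert ((sr, sc) : Int × Int) (0 : Int))).items := by
        rw [hitems0, ← ht]
        simp [PySem.Dict.getD_insert_self]
      rw [htrace]
      -- BFS final dict characterisation
      have binv0 : BfsInv maze (maze.length : Int) ((maze.headD "").toList.length : Int)
          (sr, sc) [((sr, sc) : Int × Int)]
          (PySem.Dict.empty.insert ((sr, sc) : Int × Int) (0 : Int)) := by
        refine ⟨hq0, ?_, ?_, by simp, ?_, by simp⟩
        · intro p hp
          rw [hitems0, List.mem_singleton] at hp
          subst hp
          exact ⟨le_refl 0, Reach.refl⟩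
        · intro c hcont hnotq
          have := (hcont0 c).mp hcont
          subst this
          exact absurd (by simp) hnotq
        · intro c0 r0 heq
          have hc0e : c0 = (sr, sc) := by
            have := (List.cons.injEq _ _ _ _).mp heq.symm
            exact this.1
          subst hc0e
          constructor
          · intro c hcont
            have := (hcont0 c).mp hcont
            subst this
            rw [hgetD0]
            omega
          · intro c hcont hnot
            have := (hcont0 c).mp hcont
            subst this
            exact absurd (by simp) hnot
      obtain ⟨bsound, bclosure, bpres⟩ := loopB_char maze (maze.length : Int)
        ((maze.headD "").toList.length : Int) (sr, sc)
        (maze.length * (maze.headD "").toList.length + 1) [((sr, sc) : Int × Int)]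
        (PySem.Dict.empty.insert ((sr, sc) : Int × Int) (0 : Int)) binv0 hgood0 hfuel
      have hGoodBfs := loopB_good maze (maze.length : Int)
        ((maze.headD "").toList.length : Int)
        (maze.length * (maze.headD "").toList.length + 1) [((sr, sc) : Int × Int)]
        (PySem.Dict.empty.insert ((sr, sc) : Int × Int) (0 : Int)) hgood0
      have hget?s : (loopB maze (maze.length : Int) ((maze.headD "").toList.length : Int)
          (maze.length * (maze.headD "").toList.length + 1) [((sr, sc) : Int × Int)]
          (PySem.Dict.empty.insert ((sr, sc) : Int × Int) (0 : Int))).get? (sr, sc)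
          = some 0 := by
        rw [bpres (sr, sc) (PySem.Dict.contains_insert_self _ _ _), hget?0]
      have charBfs : DictChar maze (maze.length : Int) ((maze.headD "").toList.length : Int)
          (sr, sc) (loopB maze (maze.length : Int) ((maze.headD "").toList.length : Int)
            (maze.length * (maze.headD "").toList.length + 1) [((sr, sc) : Int × Int)]
            (PySem.Dict.empty.insert ((sr, sc) : Int × Int) (0 : Int))) :=
        ⟨fun c k hR => closure_complete maze _ _ (sr, sc) _ hget?s bclosure k c hR, bsound⟩
      -- relaxation final dict characterisation
      have relchar0 : RelChar maze (maze.length : Int) ((maze.headD "").toList.length : Int)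
          (sr, sc) 0 (PySem.Dict.empty.insert ((sr, sc) : Int × Int) (0 : Int)) := by
        constructor
        · intro c
          rw [hcont0 c]
          constructor
          · intro h
            subst h
            exact ⟨0, le_refl 0, isDist_start maze _ _ _⟩
          · rintro ⟨d, hd0, hIsD⟩
            have hd : d = 0 := Nat.le_zero.mp hd0
            subst hd
            exact reach_zero maze _ _ _ c hIsD.1
        · intro p hp
          rw [hitems0, List.mem_singleton] at hp
          subst hp
          exact ⟨0, by norm_num, isDist_start maze _ _ _⟩
      have hgridkeys0 : ∀ c ∈ (PySem.Dict.empty.insert ((sr, sc) : Int × Int) (0 : Int)).keys,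
          InGrid (maze.length : Int) ((maze.headD "").toList.length : Int) c := by
        intro c hcq
        rw [hkeys0] at hcq
        simp at hcq
        subst hcq
        exact hgrid
      have hfuelR : (maze.length : Int).toNat * ((maze.headD "").toList.length : Int).toNat + 1
          ≤ (maze.length * (maze.headD "").toList.length + 1)
            + (PySem.Dict.empty.insert ((sr, sc) : Int × Int) (0 : Int)).items.length := by
        rw [hitems0]
        simp only [List.length_singleton, Int.toNat_natCast]
        omega
      obtain ⟨rcomp, rvals, rnd⟩ := relax_loop_char maze (maze.length : Int)
        ((maze.headD "").toList.length : Int) (sr, sc) hsns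
        (maze.length * (maze.headD "").toList.length + 1) 0
        (PySem.Dict.empty.insert ((sr, sc) : Int × Int) (0 : Int)) relchar0 hgood0.1
        hgridkeys0 hfuelR
      have charRel : DictChar maze (maze.length : Int) ((maze.headD "").toList.length : Int)
          (sr, sc) (relaxLoop maze (maze.length : Int) ((maze.headD "").toList.length : Int)
            (maze.length * (maze.headD "").toList.length + 1)
            (PySem.Dict.empty.insert ((sr, sc) : Int × Int) (0 : Int))) := by
        constructor
        · intro c k hR
          have hcont := rcomp k c hR
          refine ⟨hcont, ?_⟩
          rw [PySem.Dict.contains_eq_isSome_get?] at hcont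
          obtain ⟨v, hv⟩ := Option.isSome_iff_exists.mp hcont
          obtain ⟨dd, hvdp, hIsD⟩ := rvals (c, v) (PySem.Dict.mem_items_of_get?_eq_some _ hv)
          have hvd : v = (dd : Int) := hvdp
          have hddk : dd ≤ k := hIsD.2 k hR
          rw [PySem.Dict.getD_eq_get?_getD, hv]
          show v ≤ (k : Int)
          rw [hvd]
          exact_mod_cast hddk
        · intro p hp
          obtain ⟨dd, hvdp, hIsD⟩ := rvals p hp
          have hvd : p.2 = (dd : Int) := hvdp
          refine ⟨by rw [hvd]; exact Int.natCast_nonneg dd, ?_⟩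
          rw [hvd, Int.toNat_natCast]
          exact hIsD.1
      have hag : ∀ c : Int × Int,
          (loopB maze (maze.length : Int) ((maze.headD "").toList.length : Int)
            (maze.length * (maze.headD "").toList.length + 1) [((sr, sc) : Int × Int)]
            (PySem.Dict.empty.insert ((sr, sc) : Int × Int) (0 : Int))).contains c
          = (relaxLoop maze (maze.length : Int) ((maze.headD "").toList.length : Int)
            (maze.length * (maze.headD "").toList.length + 1)
            (PySem.Dict.empty.insert ((sr, sc) : Int × Int) (0 : Int))).contains c
          ∧ (loopB maze (maze.length : Int) ((maze.headD "").toList.length : Int)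
            (maze.length * (maze.headD "").toList.length + 1) [((sr, sc) : Int × Int)]
            (PySem.Dict.empty.insert ((sr, sc) : Int × Int) (0 : Int))).getD c 0
          = (relaxLoop maze (maze.length : Int) ((maze.headD "").toList.length : Int)
            (maze.length * (maze.headD "").toList.length + 1)
            (PySem.Dict.empty.insert ((sr, sc) : Int × Int) (0 : Int))).getD c 0 :=
        char_agree maze _ _ (sr, sc) _ _ charBfs charRel hGoodBfs.1 rnd
      have hfoldeq := bestFold_congr _ _ hag
        (perimeterList (maze.length : Int) ((maze.headD "").toList.length : Int)) none
      rw [← hfoldeq]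
      exact final_compare (maze.length : Int) (((maze.headD "").toList.length : Int)) _ hr hc
        hGoodBfs
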